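-- pv_equiv track=rewrite | github.com/mateus0205/ContaFeij-o | contafeijao.py | rotulacao_componentes_conexos
-- ===== SOURCE A (Python) =====
-- def rotulacao_componentes_conexos(img_bin):
--     nl, nc = len(img_bin), len(img_bin[0])
--     labels = [[0 for _ in range(nc)] for _ in range(nl)]
--     current_label = 1
--     component_sizes = {}
--
--     def flood_fill(x, y, label):
--         size = 1
--         stack = [(x, y)]
--         while stack:
--             cx, cy = stack.pop()
--             if labels[cx][cy] == 0 and img_bin[cx][cy] == 0:
--                 labels[cx][cy] = label
--                 size += 1
--                 for nx, ny in [(cx-1, cy), (cx+1, cy), (cx, cy-1), (cx, cy+1)]: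
--                     if 0 <= nx < nl and 0 <= ny < nc and labels[nx][ny] == 0 and img_bin[nx][ny] == 0:
--                         stack.append((nx, ny))
--         return size
--
--     for i in range(nl):
--         for j in range(nc):
--             if img_bin[i][j] == 0 and labels[i][j] == 0:
--                 size = flood_fill(i, j, current_label)
--                 if size in component_sizes:
--                     component_sizes[size].append(current_label)
--                 else:
--                     component_sizes[size] = [current_label]
--                 current_label += 1
--
-- # filtro dos componentes pequenos
--     min_size = 100  # Define o tamanho mínimo para manter um componente
--     for size, labels_list in component_sizes.items():
--         if size < min_size:
--             for label in labels_list: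
--                 for i in range(nl):
--                     for j in range(nc):
--                         if labels[i][j] == label:
--                             labels[i][j] = 0
--
--     return labels, current_label - 1
-- ===== SOURCE B (Python) =====
-- def rotulacao_componentes_conexos(img_bin):
--     nl, nc = len(img_bin), len(img_bin[0])
--     labels = [[0] * nc for _ in range(nl)]
--     current_label = 0
--
--     for i in range(nl):
--         for j in range(nc):
--             if img_bin[i][j] == 0 and labels[i][j] == 0:
--                 current_label += 1
--                 # BFS that marks cells when they are enqueued, so each cell
--                 # enters the worklist exactly once.
--                 labels[i][j] = current_label
--                 q = [(i, j)]
--                 qi = 0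
--                 while qi < len(q):
--                     cx, cy = q[qi]
--                     qi += 1
--                     for nx, ny in ((cx - 1, cy), (cx + 1, cy), (cx, cy - 1), (cx, cy + 1)):
--                         if 0 <= nx < nl and 0 <= ny < nc and labels[nx][ny] == 0 and img_bin[nx][ny] == 0:
--                             labels[nx][ny] = current_label
--                             q.append((nx, ny))
--
--     # One counting pass over the label matrix, then one filtering pass.
--     # A component is kept when it has at least 99 cells (A counts size as
--     # cells + 1 and keeps size >= 100).
--     counts = {}
--     for row in labels:
--         for v in row:
--             if v:
--                 counts[v] = counts.get(v, 0) + 1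
--     keep = {v for v, c in counts.items() if c >= 99}
--     out = [[v if v in keep else 0 for v in row] for row in labels]
--     return out, current_label
-- ===== Notes on version B (the rewrite author's own statement) =====
-- stated objective: alternative
-- what changed: B replaces A's stack-based flood fill (which re-checks every popped cell and may push a cell many times) by a BFS over an index-scanned queue that marks cells at enqueue time so each cell enters the worklist exactly once, and replaces A's small-component filter (one full-matrix scan per small label, driven by a size-keyed dict of label lists) by one counting pass over the label matrix plus a single filtering pass through a keep-set.
import Mathlib
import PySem

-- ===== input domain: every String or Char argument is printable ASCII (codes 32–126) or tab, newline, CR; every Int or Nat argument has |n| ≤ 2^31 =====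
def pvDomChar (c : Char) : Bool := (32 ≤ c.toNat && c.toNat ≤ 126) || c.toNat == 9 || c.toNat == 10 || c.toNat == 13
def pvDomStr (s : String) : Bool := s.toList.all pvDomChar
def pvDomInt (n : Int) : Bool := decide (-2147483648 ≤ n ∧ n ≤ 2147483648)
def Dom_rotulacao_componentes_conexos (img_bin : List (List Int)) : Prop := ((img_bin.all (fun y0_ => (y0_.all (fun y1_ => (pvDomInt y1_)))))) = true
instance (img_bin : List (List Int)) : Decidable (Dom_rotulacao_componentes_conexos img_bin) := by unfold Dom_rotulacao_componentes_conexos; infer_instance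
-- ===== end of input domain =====

-- B replaces A's stack flood fill by a mark-at-enqueue BFS and A's per-small-label rescans by one
-- counting pass plus one filtering pass (objective: alternative; equivalence of the returned value).

-- ===== PORT A =====

-- matrix read labels[i][j] / img[i][j]; every use is guarded so indices are in range
def pvG (m : List (List Int)) (i j : Int) : Int :=
  (m.getD i.toNat []).getD j.toNat 0

-- matrix write m[i][j] = v (every use is guarded so indices are in range)
def pvS (m : List (List Int)) (i j : Int) (v : Int) : List (List Int) :=
  m.set i.toNat ((m.getD i.toNat []).set j.toNat v)

-- the literal neighbour list [(cx-1,cy),(cx+1,cy),(cx,cy-1),(cx,cy+1)]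
def pvNbrs (c : Int × Int) : List (Int × Int) :=
  [(c.1 - 1, c.2), (c.1 + 1, c.2), (c.1, c.2 - 1), (c.1, c.2 + 1)]

-- 0 <= x < nl and 0 <= y < nc
def pvInb (nl nc : Int) (c : Int × Int) : Bool :=
  decide (0 ≤ c.1) && decide (c.1 < nl) && decide (0 ≤ c.2) && decide (c.2 < nc)

-- A's while-stack flood fill; the fuel only totalises the while loop (proven sufficient below)
def pvFloodA (img : List (List Int)) (nl nc lab : Int) :
    Nat → List (Int × Int) → List (List Int) → Int → List (List Int) × Int
  | _, [], L, size => (L, size)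
  | 0, _ :: _, L, size => (L, size)
  | fuel + 1, c :: st, L, size =>
    if pvG L c.1 c.2 == 0 && pvG img c.1 c.2 == 0 then
      let L' := pvS L c.1 c.2 lab
      let ns := (pvNbrs c).filter fun n =>
        pvInb nl nc n && pvG L' n.1 n.2 == 0 && pvG img n.1 n.2 == 0
      pvFloodA img nl nc lab fuel (ns.reverse ++ st) L' (size + 1)
    else
      pvFloodA img nl nc lab fuel st L size

-- A's raster scan building (labels, current_label, component_sizes)
def pvScanA (img : List (List Int)) (nl nc : Int) (fuel : Nat) :
    List (List Int) × Int × PySem.Dict Int (List Int) :=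
  (List.range img.length).foldl (fun s (i : Nat) =>
    (List.range (img.headD []).length).foldl (fun s (j : Nat) =>
      if pvG img i j == 0 && pvG s.1 i j == 0 then
        let r := pvFloodA img nl nc s.2.1 fuel [((i : Int), (j : Int))] s.1 1
        let cs := if s.2.2.contains r.2 then s.2.2.insert r.2 (s.2.2.getD r.2 [] ++ [s.2.1])
                  else s.2.2.insert r.2 [s.2.1]
        (r.1, s.2.1 + 1, cs)
      else s) s)
    (List.replicate img.length (List.replicate (img.headD []).length 0), 1, PySem.Dict.empty)

-- the inner 'for i: for j: if labels[i][j] == label: labels[i][j] = 0' scan of A's filter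
def pvZeroPass (nl nc lab : Int) (L : List (List Int)) : List (List Int) :=
  (List.range nl.toNat).foldl (fun L (i : Nat) =>
    (List.range nc.toNat).foldl (fun L (j : Nat) =>
      if pvG L i j == lab then pvS L i j 0 else L) L) L

def rotulacao_componentes_conexos (img_bin : List (List Int)) : List (List Int) × Int :=
  let nl : Int := img_bin.length
  let nc : Int := (img_bin.headD []).length
  let s := pvScanA img_bin nl nc (5 * img_bin.length * (img_bin.headD []).length + 2)
  let L := s.2.2.items.foldl (fun L p =>
    if p.1 < 100 then p.2.foldl (fun L lab => pvZeroPass nl nc lab L) L else L) s.1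
  (L, s.2.1 - 1)

-- ===== PORT B =====

-- B's BFS loop: q is scanned by the index qi and grows at the end; cells are labelled at enqueue time
def pvBfsB (img : List (List Int)) (nl nc lab : Int) :
    Nat → List (Int × Int) → Nat → List (List Int) → List (Int × Int) × List (List Int)
  | 0, q, _, L => (q, L)
  | fuel + 1, q, qi, L =>
    if qi < q.length then
      let c := q.getD qi (0, 0)
      let s := (pvNbrs c).foldl (fun (s : List (Int × Int) × List (List Int)) n =>
        if pvInb nl nc n && pvG s.2 n.1 n.2 == 0 && pvG img n.1 n.2 == 0 then
          (s.1 ++ [n], pvS s.2 n.1 n.2 lab)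
        else s) (q, L)
      pvBfsB img nl nc lab fuel s.1 (qi + 1) s.2
    else (q, L)

-- B's raster scan building (labels, current_label)
def pvScanB (img : List (List Int)) (nl nc : Int) (fuel : Nat) :
    List (List Int) × Int :=
  (List.range img.length).foldl (fun s (i : Nat) =>
    (List.range (img.headD []).length).foldl (fun s (j : Nat) =>
      if pvG img i j == 0 && pvG s.1 i j == 0 then
        let cl := s.2 + 1
        ((pvBfsB img nl nc cl fuel [((i : Int), (j : Int))] 0 (pvS s.1 i j cl)).2, cl)
      else s) s)
    (List.replicate img.length (List.replicate (img.headD []).length 0), 0)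

def rotulacao_componentes_conexos_alt (img_bin : List (List Int)) : List (List Int) × Int :=
  let nl : Int := img_bin.length
  let nc : Int := (img_bin.headD []).length
  let s := pvScanB img_bin nl nc (img_bin.length * (img_bin.headD []).length + 1)
  let counts : PySem.Dict Int Int := s.1.foldl (fun d row =>
    row.foldl (fun d v => if v != 0 then d.insert v (d.getD v 0 + 1) else d) d) PySem.Dict.empty
  let keep : PySem.Set Int := PySem.Set.ofList
    ((counts.items.filter fun p => decide (99 ≤ p.2)).map Prod.fst)
  let out := s.1.map fun row => row.map fun v => if keep.contains v then v else 0
  (out, s.2)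

-- ===== PRECONDITION & SPEC =====
-- Pre_ excludes exactly the inputs where Python A raises IndexError: the empty list (img_bin[0])
-- and ragged inputs with a row shorter than row 0 (img_bin[i][j] for j < nc).
def Pre_rotulacao_componentes_conexos (img_bin : List (List Int)) : Prop :=
  img_bin ≠ [] ∧ ∀ r ∈ img_bin, (img_bin.headD []).length ≤ r.length
instance (img_bin : List (List Int)) : Decidable (Pre_rotulacao_componentes_conexos img_bin) := by
  unfold Pre_rotulacao_componentes_conexos; infer_instance

def pvWitness_rotulacao_componentes_conexos : List (List Int) := [[0, 1], [1, 0]]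

def Spec_rotulacao_componentes_conexos (img_bin : List (List Int)) (out : List (List Int) × Int) : Prop := out = rotulacao_componentes_conexos_alt img_bin
instance (img_bin : List (List Int)) (out : List (List Int) × Int) : Decidable (Spec_rotulacao_componentes_conexos img_bin out) := by unfold Spec_rotulacao_componentes_conexos; infer_instance

-- ===== CLAIM (what is proved, stated in full; the proofs are below) =====
def Claim_equal_rotulacao_componentes_conexos : Prop := ∀ (img_bin : List (List Int)), Dom_rotulacao_componentes_conexos img_bin → Pre_rotulacao_componentes_conexos img_bin → Spec_rotulacao_componentes_conexos img_bin (rotulacao_componentes_conexos img_bin)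

-- ===== LEMMAS AND PROOFS =====

def pvCells (N M : Nat) : List (Int × Int) :=
  (List.range N).flatMap fun (i : Nat) => (List.range M).map fun (j : Nat) => ((i : Int), (j : Int))
def pvSh (N M : Nat) (L : List (List Int)) : Prop :=
  L.length = N ∧ ∀ r ∈ L, r.length = M

theorem pvInb_iff (nl nc : Int) (c : Int × Int) :
    pvInb nl nc c = true ↔ 0 ≤ c.1 ∧ c.1 < nl ∧ 0 ≤ c.2 ∧ c.2 < nc := by
  simp [pvInb, and_assoc]

theorem mem_pvCells (N M : Nat) (c : Int × Int) :
    c ∈ pvCells N M ↔ pvInb (N : Int) (M : Int) c = true := by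
  rw [pvInb_iff]
  simp only [pvCells, List.mem_flatMap, List.mem_map, List.mem_range]
  constructor
  · rintro ⟨i, hi, j, hj, rfl⟩
    refine ⟨by simp, by simpa using hi, by simp, by simpa using hj⟩
  · rintro ⟨h1, h2, h3, h4⟩
    exact ⟨c.1.toNat, by omega, c.2.toNat, by omega, by ext <;> simp <;> omega⟩

theorem nodup_pvCells (N M : Nat) : (pvCells N M).Nodup := by
  have : pvCells N M = ((List.range N).product (List.range M)).map
      (fun p => ((p.1 : Int), (p.2 : Int))) := by
    simp only [pvCells, List.product, List.map_flatMap]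
    simp [Function.comp_def]
  rw [this]
  refine List.Nodup.map ?_ (List.Nodup.product List.nodup_range List.nodup_range)
  intro a b h
  have h1 := congrArg Prod.fst h
  have h2 := congrArg Prod.snd h
  simp at h1 h2
  ext
  · exact h1
  · exact h2

theorem length_pvCells (N M : Nat) : (pvCells N M).length = N * M := by
  simp [pvCells, Function.comp]

theorem pvG_nat (L : List (List Int)) (i j : Nat) :
    pvG L (i : Int) (j : Int) = (L.getD i []).getD j 0 := by
  simp [pvG]

theorem pvSh_pvS (N M : Nat) (L : List (List Int)) (h : pvSh N M L) (i j v : Int) :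
    pvSh N M (pvS L i j v) := by
  obtain ⟨hN, hM⟩ := h
  by_cases hi : i.toNat < L.length
  · refine ⟨by simp [pvS, hN], ?_⟩
    intro r hr
    simp only [pvS] at hr
    rcases List.mem_or_eq_of_mem_set hr with h' | h'
    · exact hM r h'
    · subst h'
      rw [List.length_set]
      exact hM _ (List.getD_eq_getElem L [] hi ▸ List.getElem_mem hi)
  · unfold pvS
    rw [List.set_eq_of_length_le (by omega)]
    exact ⟨hN, hM⟩

theorem pvG_pvS_self (N M : Nat) (L : List (List Int)) (h : pvSh N M L)
    (c : Int × Int) (hc : pvInb (N : Int) (M : Int) c = true) (v : Int) :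
    pvG (pvS L c.1 c.2 v) c.1 c.2 = v := by
  obtain ⟨hN, hM⟩ := h
  rw [pvInb_iff] at hc
  have hi : c.1.toNat < L.length := by omega
  have hrow : (L.getD c.1.toNat []).length = M := by
    rw [List.getD_eq_getElem L [] hi]
    exact hM _ (List.getElem_mem hi)
  simp only [pvG, pvS]
  rw [List.getD_eq_getElem _ [] (by simpa using hi)]
  rw [List.getElem_set_self (by simpa using hi)]
  rw [List.getD_eq_getElem _ 0 (by rw [List.length_set, hrow]; omega)]
  exact List.getElem_set_self (by rw [List.length_set, hrow]; omega)

theorem pvG_pvS_ne (N M : Nat) (L : List (List Int))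
    (c d : Int × Int) (hc : pvInb (N : Int) (M : Int) c = true)
    (hd : pvInb (N : Int) (M : Int) d = true) (hne : d ≠ c) (v : Int) :
    pvG (pvS L c.1 c.2 v) d.1 d.2 = pvG L d.1 d.2 := by
  rw [pvInb_iff] at hc hd
  by_cases hrow : d.1.toNat = c.1.toNat
  · have hcol : d.2.toNat ≠ c.2.toNat := by
      intro h; apply hne; ext <;> omega
    simp only [pvG, pvS, hrow]
    by_cases hi : c.1.toNat < L.length
    · rw [List.getD_eq_getElem _ [] (by simpa using hi), List.getElem_set_self (by simpa using hi),
        List.getD_eq_getElem L [] hi]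
      rcases Nat.lt_or_ge d.2.toNat (L[c.1.toNat].length) with hj | hj
      · rw [List.getD_eq_getElem _ 0 (by rw [List.length_set]; omega),
          List.getD_eq_getElem _ 0 hj, List.getElem_set_ne (by omega)]
      · rw [List.getD_eq_default _ _ (by rw [List.length_set]; omega),
          List.getD_eq_default _ _ (by omega)]
    · rw [List.set_eq_of_length_le (by omega)]
  · simp only [pvG, pvS]
    by_cases hi : d.1.toNat < L.length
    · rw [List.getD_eq_getElem _ [] (by rw [List.length_set]; omega),
        List.getD_eq_getElem _ [] hi, List.getElem_set_ne (by omega)]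
    · have h1 : (L.set c.1.toNat ((L.getD c.1.toNat []).set c.2.toNat v)).getD d.1.toNat [] = [] :=
        List.getD_eq_default _ _ (by rw [List.length_set]; omega)
      have h2 : L.getD d.1.toNat ([] : List Int) = [] := List.getD_eq_default _ _ (by omega)
      rw [h1, h2]

theorem pvMatExt (N M : Nat) (L₁ L₂ : List (List Int))
    (h₁ : pvSh N M L₁) (h₂ : pvSh N M L₂)
    (h : ∀ c : Int × Int, pvInb (N : Int) (M : Int) c = true →
      pvG L₁ c.1 c.2 = pvG L₂ c.1 c.2) : L₁ = L₂ := by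
  obtain ⟨hN₁, hM₁⟩ := h₁
  obtain ⟨hN₂, hM₂⟩ := h₂
  apply List.ext_getElem (by omega)
  intro i hi hi'
  apply List.ext_getElem
  · rw [hM₁ _ (List.getElem_mem hi), hM₂ _ (List.getElem_mem hi')]
  intro j hj hj'
  have hjM : j < M := by rw [hM₁ _ (List.getElem_mem hi)] at hj; exact hj
  have hiN : i < N := by omega
  have := h ((i : Int), (j : Int)) (by rw [pvInb_iff]; exact ⟨by simp, by simpa using hiN, by simp, by simpa using hjM⟩)
  simp only [pvG_nat] at this
  rwa [List.getD_eq_getElem L₁ [] hi, List.getD_eq_getElem L₂ [] hi',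
    List.getD_eq_getElem _ 0 hj, List.getD_eq_getElem _ 0 hj'] at this

inductive PvReach (P : Int × Int → Prop) : (Int × Int) → (Int × Int) → Prop
  | refl (a : Int × Int) : P a → PvReach P a a
  | step (a b c : Int × Int) : PvReach P a b → c ∈ pvNbrs b → P c → PvReach P a c

theorem PvReach.src {P : Int × Int → Prop} {a b : Int × Int} (h : PvReach P a b) : P a := by
  induction h with
  | refl h => exact h
  | step _ _ _ _ _ ih => exact ih

theorem PvReach.dst {P : Int × Int → Prop} {a b : Int × Int} (h : PvReach P a b) : P b := by
  cases h with
  | refl h => exact h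
  | step _ _ _ _ hp => exact hp

theorem PvReach.mono {P Q : Int × Int → Prop} (hPQ : ∀ x, P x → Q x) {a b : Int × Int}
    (h : PvReach P a b) : PvReach Q a b := by
  induction h with
  | refl h => exact .refl _ (hPQ _ h)
  | step b c hr hn hc ih => exact .step _ b c ih hn (hPQ _ hc)

theorem PvReach.trans {P : Int × Int → Prop} {a b c : Int × Int}
    (h₁ : PvReach P a b) (h₂ : PvReach P b c) : PvReach P a c := by
  induction h₂ with
  | refl _ => exact h₁
  | step d e hr hn he ih => exact .step _ d e ih hn he

theorem PvReach.del {P Q : Int × Int → Prop} {a d : Int × Int} (h : PvReach P a d) :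
    Q d ∨ ∃ a', ¬ Q a' ∧ (a' = a ∨ ∃ x, Q x ∧ a' ∈ pvNbrs x ∧ P a') ∧
      PvReach (fun y => P y ∧ ¬ Q y) a' d := by
  induction h with
  | refl ha =>
    by_cases hq : Q a
    · exact Or.inl hq
    · exact Or.inr ⟨_, hq, Or.inl rfl, .refl _ ⟨ha, hq⟩⟩
  | step b d hab hn hd ih =>
    by_cases hq : Q d
    · exact Or.inl hq
    · rcases ih with hb | ⟨a', ha'q, ha'src, hreach⟩
      · exact Or.inr ⟨_, hq, Or.inr ⟨_, hb, hn, hd⟩, .refl _ ⟨hd, hq⟩⟩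
      · exact Or.inr ⟨a', ha'q, ha'src, .step _ _ _ hreach hn ⟨hd, hq⟩⟩

-- counting: flipping a predicate at one list member
theorem pvCountP_flip {α : Type} (c : α) (p p' : α → Bool) :
    ∀ (l : List α), l.Nodup → c ∈ l → (∀ x ∈ l, x ≠ c → p' x = p x) →
    l.countP p' + (if p c then 1 else 0) = l.countP p + (if p' c then 1 else 0) := by
  intro l
  induction l with
  | nil => intro _ h; cases h
  | cons a l ih =>
    intro hnd hc hag
    rcases List.mem_cons.mp hc with rfl | hc'
    · have : ∀ x ∈ l, p' x = p x := by
        intro x hx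
        exact hag x (List.mem_cons_of_mem _ hx) (fun hxc => (List.nodup_cons.mp hnd).1 (hxc ▸ hx))
      have hcongr : l.countP p' = l.countP p :=
        List.countP_congr (fun x hx => by simp [this x hx])
      rw [List.countP_cons, List.countP_cons, hcongr]
      omega
    · have ha : a ≠ c := fun h => (List.nodup_cons.mp hnd).1 (h ▸ hc')
      have := ih (List.nodup_cons.mp hnd).2 hc' (fun x hx => hag x (List.mem_cons_of_mem _ hx))
      rw [List.countP_cons, List.countP_cons, hag a (List.mem_cons_self) ha]
      omega

def pvCondB (img L : List (List Int)) (nl nc : Int) (n : Int × Int) : Bool :=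
  pvInb nl nc n && pvG L n.1 n.2 == 0 && pvG img n.1 n.2 == 0

def pvU (img : List (List Int)) (N M : Nat) (L : List (List Int)) : Nat :=
  (pvCells N M).countP (pvCondB img L (N : Int) (M : Int))

def pvCnt (N M : Nat) (L : List (List Int)) (v : Int) : Nat :=
  (pvCells N M).countP (fun c => pvG L c.1 c.2 == v)

theorem pvCondB_iff (img L : List (List Int)) (nl nc : Int) (n : Int × Int) :
    pvCondB img L nl nc n = true ↔
      pvInb nl nc n = true ∧ pvG L n.1 n.2 = 0 ∧ pvG img n.1 n.2 = 0 := by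
  simp [pvCondB, and_assoc]

-- flipping one labelled cell
theorem pvCondB_pvS (img : List (List Int)) (N M : Nat) (L : List (List Int))
    (hsh : pvSh N M L) (c : Int × Int) (hcinb : pvInb (N : Int) (M : Int) c = true)
    (lab : Int) (hlab : lab ≠ 0) (x : Int × Int) (hx : x ≠ c) :
    pvCondB img (pvS L c.1 c.2 lab) (N : Int) (M : Int) x = pvCondB img L (N : Int) (M : Int) x := by
  by_cases hxin : pvInb (N : Int) (M : Int) x = true
  · simp only [pvCondB, pvG_pvS_ne N M L c x hcinb hxin hx lab]
  · simp only [pvCondB, Bool.eq_false_iff.mpr hxin, Bool.false_and]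

theorem pvU_pvS (img : List (List Int)) (N M : Nat) (L : List (List Int))
    (hsh : pvSh N M L) (c : Int × Int) (hok : pvCondB img L (N : Int) (M : Int) c = true)
    (lab : Int) (hlab : lab ≠ 0) :
    pvU img N M L = pvU img N M (pvS L c.1 c.2 lab) + 1 := by
  have hcinb : pvInb (N : Int) (M : Int) c = true := ((pvCondB_iff _ _ _ _ _).mp hok).1
  have hflip := pvCountP_flip c (pvCondB img L (N : Int) (M : Int))
    (pvCondB img (pvS L c.1 c.2 lab) (N : Int) (M : Int)) (pvCells N M)
    (nodup_pvCells N M) ((mem_pvCells N M c).mpr hcinb)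
    (fun x _ hx => pvCondB_pvS img N M L hsh c hcinb lab hlab x hx)
  have h1 : pvCondB img (pvS L c.1 c.2 lab) (N : Int) (M : Int) c = false := by
    rw [Bool.eq_false_iff]
    intro hcontra
    have := ((pvCondB_iff _ _ _ _ _).mp hcontra).2.1
    rw [pvG_pvS_self N M L hsh c hcinb lab] at this
    exact hlab this
  rw [hok, h1] at hflip
  norm_num at hflip
  unfold pvU
  omega

theorem pvCnt_pvS (N M : Nat) (L : List (List Int)) (hsh : pvSh N M L)
    (c : Int × Int) (hcinb : pvInb (N : Int) (M : Int) c = true)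
    (hzero : pvG L c.1 c.2 = 0) (lab : Int) (hlab : lab ≠ 0) :
    pvCnt N M (pvS L c.1 c.2 lab) lab = pvCnt N M L lab + 1 := by
  have hflip := pvCountP_flip c (fun x => pvG L x.1 x.2 == lab)
    (fun x => pvG (pvS L c.1 c.2 lab) x.1 x.2 == lab) (pvCells N M)
    (nodup_pvCells N M) ((mem_pvCells N M c).mpr hcinb)
    (fun x hx hxc => by
      show (pvG (pvS L c.1 c.2 lab) x.1 x.2 == lab) = (pvG L x.1 x.2 == lab)
      rw [pvG_pvS_ne N M L c x hcinb ((mem_pvCells N M x).mp hx) hxc lab])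
  have h1 : (pvG L c.1 c.2 == lab) = false := by simp [hzero, Ne.symm hlab]
  have h2 : (pvG (pvS L c.1 c.2 lab) c.1 c.2 == lab) = true := by
    simp [pvG_pvS_self N M L hsh c hcinb lab]
  simp only [h1, h2] at hflip
  norm_num at hflip
  unfold pvCnt
  omega

-- cells changed only from 0 to a fresh label keep every old count
theorem pvCnt_stable (N M : Nat) (L L' : List (List Int)) (lab v : Int)
    (hv : v ≠ 0) (hvlab : v ≠ lab)
    (h : ∀ c : Int × Int, pvInb (N : Int) (M : Int) c = true →
      pvG L' c.1 c.2 = pvG L c.1 c.2 ∨ (pvG L c.1 c.2 = 0 ∧ pvG L' c.1 c.2 = lab)) :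
    pvCnt N M L' v = pvCnt N M L v := by
  unfold pvCnt
  apply List.countP_congr
  intro c hc
  rcases h c ((mem_pvCells N M c).mp hc) with h' | ⟨h0, h1⟩
  · rw [h']
  · rw [h0, h1]
    simp [beq_iff_eq, Ne.symm hv, Ne.symm hvlab]

-- the one-pop reachability decomposition of A's flood fill
theorem pvReach_pop (img : List (List Int)) (N M : Nat) (L : List (List Int))
    (hsh : pvSh N M L) (lab : Int) (hlab : lab ≠ 0)
    (c : Int × Int) (hok : pvCondB img L (N : Int) (M : Int) c = true)
    (st : List (Int × Int)) (d : Int × Int) :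
    ((∃ s ∈ c :: st, PvReach (fun y => pvCondB img L (N : Int) (M : Int) y = true) s d) ↔
      (d = c ∨ ∃ s ∈ (pvNbrs c).filter (pvCondB img (pvS L c.1 c.2 lab) (N : Int) (M : Int)) ++ st,
        PvReach (fun y => pvCondB img (pvS L c.1 c.2 lab) (N : Int) (M : Int) y = true) s d)) := by
  have hcinb : pvInb (N : Int) (M : Int) c = true := ((pvCondB_iff _ _ _ _ _).mp hok).1
  have hP'ext : ∀ y, (pvCondB img (pvS L c.1 c.2 lab) (N : Int) (M : Int) y = true) ↔
      ((pvCondB img L (N : Int) (M : Int) y = true) ∧ ¬ (y = c)) := by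
    intro y
    by_cases hyc : y = c
    · subst hyc
      simp only [not_true, and_false, iff_false]
      intro hcontra
      have := ((pvCondB_iff _ _ _ _ _).mp hcontra).2.1
      rw [pvG_pvS_self N M L hsh y hcinb lab] at this
      exact hlab this
    · rw [pvCondB_pvS img N M L hsh c hcinb lab hlab y hyc]
      simp [hyc]
  constructor
  · rintro ⟨s, hs, hr⟩
    rcases PvReach.del (Q := fun y => y = c) hr with hd | ⟨a', ha'ne, hsrc, hr'⟩
    · exact Or.inl hd
    · have hr'' : PvReach (fun y => pvCondB img (pvS L c.1 c.2 lab) (N : Int) (M : Int) y = true) a' d :=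
        hr'.mono (fun x hx => (hP'ext x).mpr ⟨hx.1, hx.2⟩)
      rcases hsrc with rfl | ⟨x, rfl, hnb, hPa'⟩
      · rcases List.mem_cons.mp hs with rfl | hs'
        · exact absurd rfl ha'ne
        · exact Or.inr ⟨a', List.mem_append_right _ hs', hr''⟩
      · refine Or.inr ⟨a', List.mem_append_left _ ?_, hr''⟩
        rw [List.mem_filter]
        exact ⟨hnb, (hP'ext a').mpr ⟨hPa', ha'ne⟩⟩
  · rintro (rfl | ⟨s, hs, hr⟩)
    · exact ⟨d, List.mem_cons_self, .refl d hok⟩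
    · have hrP : PvReach (fun y => pvCondB img L (N : Int) (M : Int) y = true) s d :=
        hr.mono (fun x hx => ((hP'ext x).mp hx).1)
      rcases List.mem_append.mp hs with hns | hst
      · have hf := List.mem_filter.mp hns
        have hPs : pvCondB img L (N : Int) (M : Int) s = true := ((hP'ext s).mp hf.2).1
        exact ⟨c, List.mem_cons_self,
          PvReach.trans (PvReach.step c c s (.refl c hok) hf.1 hPs) hrP⟩
      · exact ⟨s, List.mem_cons_of_mem _ hst, hrP⟩

theorem length_pvNbrs (c : Int × Int) : (pvNbrs c).length = 4 := by simp [pvNbrs]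

theorem pvFloodA_spec (img : List (List Int)) (N M : Nat) (lab : Int) (hlab : lab ≠ 0) :
    ∀ (fuel : Nat) (st : List (Int × Int)) (L : List (List Int)) (size : Int),
    pvSh N M L → (∀ s ∈ st, pvInb (N : Int) (M : Int) s = true) →
    st.length + 5 * pvU img N M L < fuel →
    pvSh N M (pvFloodA img (N : Int) (M : Int) lab fuel st L size).1 ∧
    (∀ c, pvInb (N : Int) (M : Int) c = true →
      ((∃ s ∈ st, PvReach (fun y => pvCondB img L (N : Int) (M : Int) y = true) s c) →
        pvG (pvFloodA img (N : Int) (M : Int) lab fuel st L size).1 c.1 c.2 = lab) ∧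
      (¬ (∃ s ∈ st, PvReach (fun y => pvCondB img L (N : Int) (M : Int) y = true) s c) →
        pvG (pvFloodA img (N : Int) (M : Int) lab fuel st L size).1 c.1 c.2 = pvG L c.1 c.2)) ∧
    ((pvFloodA img (N : Int) (M : Int) lab fuel st L size).2 =
      size + ((pvCnt N M (pvFloodA img (N : Int) (M : Int) lab fuel st L size).1 lab : Int)
        - (pvCnt N M L lab : Int))) := by
  intro fuel
  induction fuel with
  | zero => intro st L size _ _ hbound; omega
  | succ fuel ih =>
    intro st L size hsh hstack hbound
    match st with
    | [] =>
      refine ⟨hsh, ?_, by simp [pvFloodA]⟩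
      intro c hc
      refine ⟨?_, fun _ => by simp [pvFloodA]⟩
      rintro ⟨s, hs, -⟩
      cases hs
    | c :: st =>
      by_cases hcond : (pvG L c.1 c.2 == 0 && pvG img c.1 c.2 == 0) = true
      · have hcinb : pvInb (N : Int) (M : Int) c = true := hstack c List.mem_cons_self
        have hok : pvCondB img L (N : Int) (M : Int) c = true := by
          rw [pvCondB_iff]
          simp only [Bool.and_eq_true, beq_iff_eq] at hcond
          exact ⟨hcinb, hcond.1, hcond.2⟩
        have hstep : pvFloodA img (N : Int) (M : Int) lab (fuel + 1) (c :: st) L size =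
            pvFloodA img (N : Int) (M : Int) lab fuel
              (((pvNbrs c).filter (pvCondB img (pvS L c.1 c.2 lab) (N : Int) (M : Int))).reverse ++ st)
              (pvS L c.1 c.2 lab) (size + 1) := by
          simp only [pvFloodA, if_pos hcond]
          rfl
        rw [hstep]
        have hsh' : pvSh N M (pvS L c.1 c.2 lab) := pvSh_pvS N M L hsh c.1 c.2 lab
        have hstack' : ∀ s ∈ ((pvNbrs c).filter (pvCondB img (pvS L c.1 c.2 lab) (N : Int) (M : Int))).reverse ++ st,
            pvInb (N : Int) (M : Int) s = true := by
          intro s hs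
          rcases List.mem_append.mp hs with hs' | hs'
          · exact ((pvCondB_iff _ _ _ _ _).mp (List.mem_filter.mp (List.mem_reverse.mp hs')).2).1
          · exact hstack s (List.mem_cons_of_mem _ hs')
        have hU : pvU img N M L = pvU img N M (pvS L c.1 c.2 lab) + 1 :=
          pvU_pvS img N M L hsh c hok lab hlab
        have hns4 : ((pvNbrs c).filter (pvCondB img (pvS L c.1 c.2 lab) (N : Int) (M : Int))).length ≤ 4 := by
          have := List.length_filter_le (pvCondB img (pvS L c.1 c.2 lab) (N : Int) (M : Int)) (pvNbrs c)
          rwa [length_pvNbrs] at this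
        have hbound' : (((pvNbrs c).filter (pvCondB img (pvS L c.1 c.2 lab) (N : Int) (M : Int))).reverse ++ st).length
            + 5 * pvU img N M (pvS L c.1 c.2 lab) < fuel := by
          rw [List.length_append, List.length_reverse]
          simp only [List.length_cons] at hbound
          omega
        obtain ⟨ih1, ih2, ih3⟩ := ih _ _ (size + 1) hsh' hstack' hbound'
        refine ⟨ih1, ?_, ?_⟩
        · intro d hd
          have hpop := pvReach_pop img N M L hsh lab hlab c hok st d
          have hmemiff : (∃ s ∈ ((pvNbrs c).filter (pvCondB img (pvS L c.1 c.2 lab) (N : Int) (M : Int))).reverse ++ st,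
              PvReach (fun y => pvCondB img (pvS L c.1 c.2 lab) (N : Int) (M : Int) y = true) s d) ↔
              (∃ s ∈ (pvNbrs c).filter (pvCondB img (pvS L c.1 c.2 lab) (N : Int) (M : Int)) ++ st,
              PvReach (fun y => pvCondB img (pvS L c.1 c.2 lab) (N : Int) (M : Int) y = true) s d) := by
            constructor <;> rintro ⟨s, hs, hr⟩ <;> refine ⟨s, ?_, hr⟩ <;>
              simp only [List.mem_append, List.mem_reverse] at hs ⊢ <;> exact hs
          constructor
          · intro hreach
            rcases hpop.mp hreach with rfl | hex
            · by_cases hin : ∃ s ∈ ((pvNbrs d).filter (pvCondB img (pvS L d.1 d.2 lab) (N : Int) (M : Int))).reverse ++ st,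
                  PvReach (fun y => pvCondB img (pvS L d.1 d.2 lab) (N : Int) (M : Int) y = true) s d
              · exact (ih2 d hd).1 hin
              · rw [(ih2 d hd).2 hin]
                exact pvG_pvS_self N M L hsh d hcinb lab
            · exact (ih2 d hd).1 (hmemiff.mpr hex)
          · intro hreach
            have hdc : d ≠ c := by
              rintro rfl
              exact hreach ⟨d, List.mem_cons_self, .refl d hok⟩
            have hnin : ¬ ∃ s ∈ ((pvNbrs c).filter (pvCondB img (pvS L c.1 c.2 lab) (N : Int) (M : Int))).reverse ++ st,
                PvReach (fun y => pvCondB img (pvS L c.1 c.2 lab) (N : Int) (M : Int) y = true) s d := by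
              intro hin
              exact hreach (hpop.mpr (Or.inr (hmemiff.mp hin)))
            rw [(ih2 d hd).2 hnin]
            exact pvG_pvS_ne N M L c d hcinb hd hdc lab
        · rw [ih3]
          have hzero : pvG L c.1 c.2 = 0 := ((pvCondB_iff _ _ _ _ _).mp hok).2.1
          have hcnt : pvCnt N M (pvS L c.1 c.2 lab) lab = pvCnt N M L lab + 1 :=
            pvCnt_pvS N M L hsh c hcinb hzero lab hlab
          rw [hcnt]
          push_cast
          ring
      · have hstep : pvFloodA img (N : Int) (M : Int) lab (fuel + 1) (c :: st) L size =
            pvFloodA img (N : Int) (M : Int) lab fuel st L size := by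
          simp only [pvFloodA, if_neg hcond]
        rw [hstep]
        have hbound' : st.length + 5 * pvU img N M L < fuel := by
          simp only [List.length_cons] at hbound; omega
        obtain ⟨ih1, ih2, ih3⟩ := ih st L size hsh (fun s hs => hstack s (List.mem_cons_of_mem _ hs)) hbound'
        refine ⟨ih1, ?_, ih3⟩
        intro d hd
        have hiff : (∃ s ∈ c :: st, PvReach (fun y => pvCondB img L (N : Int) (M : Int) y = true) s d) ↔
            (∃ s ∈ st, PvReach (fun y => pvCondB img L (N : Int) (M : Int) y = true) s d) := by
          constructor
          · rintro ⟨s, hs, hr⟩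
            rcases List.mem_cons.mp hs with rfl | hs'
            · exfalso
              have hPc := hr.src
              rw [pvCondB_iff] at hPc
              exact hcond (by simp [hPc.2.1, hPc.2.2])
            · exact ⟨s, hs', hr⟩
          · rintro ⟨s, hs, hr⟩
            exact ⟨s, List.mem_cons_of_mem _ hs, hr⟩
        exact ⟨fun h => (ih2 d hd).1 (hiff.mp h), fun h => (ih2 d hd).2 (fun h' => h (hiff.mpr h'))⟩

def pvSetAll (lab : Int) (cs : List (Int × Int)) (L : List (List Int)) : List (List Int) :=
  cs.foldl (fun L n => pvS L n.1 n.2 lab) L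

theorem pvNbrs_pairwise (c : Int × Int) : (pvNbrs c).Pairwise (· ≠ ·) := by
  refine .cons ?_ (.cons ?_ (.cons ?_ (.cons (fun a ha => absurd ha List.not_mem_nil) .nil))) <;>
    (intro a ha; rintro rfl;
     simp only [pvNbrs, List.mem_cons, List.not_mem_nil, or_false, Prod.mk.injEq] at ha; omega)

theorem pvFoldNbrs (img : List (List Int)) (N M : Nat) (lab : Int) (hlab : lab ≠ 0) :
    ∀ (ns : List (Int × Int)), ns.Pairwise (· ≠ ·) →
    ∀ (q : List (Int × Int)) (L : List (List Int)), pvSh N M L →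
    ns.foldl (fun (s : List (Int × Int) × List (List Int)) n =>
        if pvInb (N : Int) (M : Int) n && pvG s.2 n.1 n.2 == 0 && pvG img n.1 n.2 == 0 then
          (s.1 ++ [n], pvS s.2 n.1 n.2 lab)
        else s) (q, L)
      = (q ++ ns.filter (pvCondB img L (N : Int) (M : Int)),
         pvSetAll lab (ns.filter (pvCondB img L (N : Int) (M : Int))) L) := by
  intro ns
  induction ns with
  | nil => intro _ q L _; simp [pvSetAll]
  | cons n ns ih =>
    intro hpw q L hsh
    have hpw' := (List.pairwise_cons.mp hpw).2
    have hne := (List.pairwise_cons.mp hpw).1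
    rw [List.foldl_cons]
    by_cases hc : pvCondB img L (N : Int) (M : Int) n = true
    · have hcinb : pvInb (N : Int) (M : Int) n = true := ((pvCondB_iff _ _ _ _ _).mp hc).1
      have hc' : (pvInb (N : Int) (M : Int) n && pvG L n.1 n.2 == 0 && pvG img n.1 n.2 == 0) = true := hc
      have hstep : (if pvInb (N : Int) (M : Int) n && pvG L n.1 n.2 == 0 && pvG img n.1 n.2 == 0 then
          (q ++ [n], pvS L n.1 n.2 lab) else (q, L)) = (q ++ [n], pvS L n.1 n.2 lab) := by
        rw [if_pos hc']
      rw [hstep, ih hpw' (q ++ [n]) (pvS L n.1 n.2 lab) (pvSh_pvS N M L hsh n.1 n.2 lab)]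
      have hfe : ns.filter (pvCondB img (pvS L n.1 n.2 lab) (N : Int) (M : Int)) =
          ns.filter (pvCondB img L (N : Int) (M : Int)) :=
        List.filter_congr (fun x hx => pvCondB_pvS img N M L hsh n hcinb lab hlab x (Ne.symm (hne x hx)))
      rw [hfe, List.filter_cons_of_pos hc]
      simp [pvSetAll, List.append_assoc]
    · have hc' : ¬ ((pvInb (N : Int) (M : Int) n && pvG L n.1 n.2 == 0 && pvG img n.1 n.2 == 0) = true) := hc
      have hstep : (if pvInb (N : Int) (M : Int) n && pvG L n.1 n.2 == 0 && pvG img n.1 n.2 == 0 then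
          (q ++ [n], pvS L n.1 n.2 lab) else (q, L)) = (q, L) := by
        rw [if_neg hc']
      rw [hstep, ih hpw' q L hsh, List.filter_cons_of_neg hc]

theorem pvSetAll_spec (img : List (List Int)) (N M : Nat) (lab : Int) :
    ∀ (cs : List (Int × Int)), cs.Pairwise (· ≠ ·) →
    (∀ x ∈ cs, pvInb (N : Int) (M : Int) x = true) →
    ∀ L, pvSh N M L →
    pvSh N M (pvSetAll lab cs L) ∧
    (∀ d, pvInb (N : Int) (M : Int) d = true →
      (d ∈ cs → pvG (pvSetAll lab cs L) d.1 d.2 = lab) ∧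
      (d ∉ cs → pvG (pvSetAll lab cs L) d.1 d.2 = pvG L d.1 d.2)) := by
  intro cs
  induction cs with
  | nil => intro _ _ L hsh; exact ⟨hsh, fun d _ => ⟨fun h => absurd h (List.not_mem_nil), fun _ => rfl⟩⟩
  | cons e cs ih =>
    intro hpw hinb L hsh
    have hpw' := (List.pairwise_cons.mp hpw).2
    have hnee := (List.pairwise_cons.mp hpw).1
    have heinb : pvInb (N : Int) (M : Int) e = true := hinb e List.mem_cons_self
    have hsh₁ : pvSh N M (pvS L e.1 e.2 lab) := pvSh_pvS N M L hsh e.1 e.2 lab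
    obtain ⟨ihsh, ihc⟩ := ih hpw' (fun x hx => hinb x (List.mem_cons_of_mem _ hx)) (pvS L e.1 e.2 lab) hsh₁
    have hunf : pvSetAll lab (e :: cs) L = pvSetAll lab cs (pvS L e.1 e.2 lab) := rfl
    rw [hunf]
    refine ⟨ihsh, ?_⟩
    intro d hd
    constructor
    · intro hmem
      rcases List.mem_cons.mp hmem with rfl | hmem'
      · have hdnotcs : d ∉ cs := fun h => (hnee d h) rfl
        rw [(ihc d hd).2 hdnotcs]
        exact pvG_pvS_self N M L hsh d heinb lab
      · exact (ihc d hd).1 hmem'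
    · intro hnmem
      have hdne : d ≠ e := fun h => hnmem (h ▸ List.mem_cons_self)
      rw [(ihc d hd).2 (fun h => hnmem (List.mem_cons_of_mem _ h))]
      exact pvG_pvS_ne N M L e d heinb hd hdne lab

theorem pvU_setAll (img : List (List Int)) (N M : Nat) (lab : Int) (hlab : lab ≠ 0) :
    ∀ (cs : List (Int × Int)), cs.Pairwise (· ≠ ·) →
    ∀ L, pvSh N M L → (∀ x ∈ cs, pvCondB img L (N : Int) (M : Int) x = true) →
    pvU img N M L = pvU img N M (pvSetAll lab cs L) + cs.length := by
  intro cs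
  induction cs with
  | nil => intro _ L _ _; simp [pvSetAll]
  | cons e cs ih =>
    intro hpw L hsh hok
    have hpw' := (List.pairwise_cons.mp hpw).2
    have hnee := (List.pairwise_cons.mp hpw).1
    have heok := hok e List.mem_cons_self
    have heinb : pvInb (N : Int) (M : Int) e = true := ((pvCondB_iff _ _ _ _ _).mp heok).1
    have h1 : pvU img N M L = pvU img N M (pvS L e.1 e.2 lab) + 1 :=
      pvU_pvS img N M L hsh e heok lab hlab
    have hok' : ∀ x ∈ cs, pvCondB img (pvS L e.1 e.2 lab) (N : Int) (M : Int) x = true := by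
      intro x hx
      rw [pvCondB_pvS img N M L hsh e heinb lab hlab x (Ne.symm (hnee x hx))]
      exact hok x (List.mem_cons_of_mem _ hx)
    have h2 := ih hpw' (pvS L e.1 e.2 lab) (pvSh_pvS N M L hsh e.1 e.2 lab) hok'
    have hunf : pvSetAll lab (e :: cs) L = pvSetAll lab cs (pvS L e.1 e.2 lab) := rfl
    rw [hunf, List.length_cons]
    omega

-- B's start-exempt reachability: from a labelled queue cell into the unlabelled region
def PvRB (P : Int × Int → Prop) (s d : Int × Int) : Prop :=
  s = d ∨ ∃ m ∈ pvNbrs s, P m ∧ PvReach P m d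

theorem PvRB.mono {P Q : Int × Int → Prop} (hPQ : ∀ x, P x → Q x) {s d : Int × Int}
    (h : PvRB P s d) : PvRB Q s d := by
  rcases h with rfl | ⟨m, hm, hPm, hr⟩
  · exact Or.inl rfl
  · exact Or.inr ⟨m, hm, hPQ m hPm, hr.mono hPQ⟩

-- one BFS step: processing cell c enqueues and labels exactly ens = filter (pvCondB L) (pvNbrs c)
theorem pvRB_step (img : List (List Int)) (N M : Nat) (L : List (List Int))
    (hsh : pvSh N M L) (lab : Int) (hlab : lab ≠ 0)
    (c : Int × Int) (hcinb : pvInb (N : Int) (M : Int) c = true)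
    (hclab : pvG L c.1 c.2 = lab)
    (rest : List (Int × Int)) (d : Int × Int) :
    ((∃ s ∈ rest ++ (pvNbrs c).filter (pvCondB img L (N : Int) (M : Int)),
        PvRB (fun y => pvCondB img (pvSetAll lab ((pvNbrs c).filter (pvCondB img L (N : Int) (M : Int))) L) (N : Int) (M : Int) y = true) s d) →
      (∃ s ∈ c :: rest, PvRB (fun y => pvCondB img L (N : Int) (M : Int) y = true) s d)) ∧
    ((∃ s ∈ c :: rest, PvRB (fun y => pvCondB img L (N : Int) (M : Int) y = true) s d) →
      (d = c ∨ d ∈ (pvNbrs c).filter (pvCondB img L (N : Int) (M : Int)) ∨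
        ∃ s ∈ rest ++ (pvNbrs c).filter (pvCondB img L (N : Int) (M : Int)),
          PvRB (fun y => pvCondB img (pvSetAll lab ((pvNbrs c).filter (pvCondB img L (N : Int) (M : Int))) L) (N : Int) (M : Int) y = true) s d)) := by
  set ens := (pvNbrs c).filter (pvCondB img L (N : Int) (M : Int)) with hens
  have hpw : ens.Pairwise (· ≠ ·) := (pvNbrs_pairwise c).filter _
  have hensinb : ∀ x ∈ ens, pvInb (N : Int) (M : Int) x = true :=
    fun x hx => ((pvCondB_iff _ _ _ _ _).mp (List.mem_filter.mp hx).2).1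
  obtain ⟨hsh₁, hchar⟩ := pvSetAll_spec img N M lab ens hpw hensinb L hsh
  have hP₁ext : ∀ y, (pvCondB img (pvSetAll lab ens L) (N : Int) (M : Int) y = true) ↔
      ((pvCondB img L (N : Int) (M : Int) y = true) ∧ ¬ (y ∈ ens)) := by
    intro y
    by_cases hyin : pvInb (N : Int) (M : Int) y = true
    · by_cases hyens : y ∈ ens
      · simp only [hyens, not_true, and_false, iff_false]
        intro hcontra
        have := ((pvCondB_iff _ _ _ _ _).mp hcontra).2.1
        rw [(hchar y hyin).1 hyens] at this
        exact hlab this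
      · have := (hchar y hyin).2 hyens
        simp only [pvCondB, this, hyens, not_false_iff, and_true]
    · constructor
      · intro h; exact absurd ((pvCondB_iff _ _ _ _ _).mp h).1 hyin
      · rintro ⟨h, -⟩; exact absurd ((pvCondB_iff _ _ _ _ _).mp h).1 hyin
  constructor
  · rintro ⟨s, hs, hrb⟩
    have hrbP : PvRB (fun y => pvCondB img L (N : Int) (M : Int) y = true) s d :=
      hrb.mono (fun x hx => ((hP₁ext x).mp hx).1)
    rcases List.mem_append.mp hs with hrest | hsens
    · exact ⟨s, List.mem_cons_of_mem _ hrest, hrbP⟩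
    · have hsnb : s ∈ pvNbrs c := (List.mem_filter.mp hsens).1
      have hsP : pvCondB img L (N : Int) (M : Int) s = true := (List.mem_filter.mp hsens).2
      refine ⟨c, List.mem_cons_self, Or.inr ⟨s, hsnb, hsP, ?_⟩⟩
      rcases hrbP with rfl | ⟨m, hm, hPm, hr⟩
      · exact .refl s hsP
      · exact PvReach.trans (PvReach.step s s m (.refl s hsP) hm hPm) hr
  · rintro ⟨s, hs, hrb⟩
    rcases List.mem_cons.mp hs with rfl | hrest
    · rcases hrb with rfl | ⟨m, hm, hPm, hr⟩
      · exact Or.inl rfl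
      · have hmens : m ∈ ens := List.mem_filter.mpr ⟨hm, hPm⟩
        rcases PvReach.del (Q := fun y => y ∈ ens) hr with hd | ⟨a', ha'ne, hsrc, hr'⟩
        · exact Or.inr (Or.inl hd)
        · rcases hsrc with rfl | ⟨x, hxens, ha'nb, hPa'⟩
          · exact absurd hmens ha'ne
          · refine Or.inr (Or.inr ⟨x, List.mem_append_right _ hxens, Or.inr ⟨a', ha'nb, (hP₁ext a').mpr ⟨hPa', ha'ne⟩, ?_⟩⟩)
            exact hr'.mono (fun y hy => (hP₁ext y).mpr ⟨hy.1, hy.2⟩)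
    · rcases hrb with rfl | ⟨m, hm, hPm, hr⟩
      · exact Or.inr (Or.inr ⟨s, List.mem_append_left _ hrest, Or.inl rfl⟩)
      · rcases PvReach.del (Q := fun y => y ∈ ens) hr with hd | ⟨a', ha'ne, hsrc, hr'⟩
        · exact Or.inr (Or.inl hd)
        · have hr₁ := hr'.mono (fun y hy => (hP₁ext y).mpr ⟨hy.1, hy.2⟩)
          rcases hsrc with rfl | ⟨x, hxens, ha'nb, hPa'⟩
          · exact Or.inr (Or.inr ⟨s, List.mem_append_left _ hrest,
              Or.inr ⟨a', hm, (hP₁ext a').mpr ⟨hPm, ha'ne⟩, hr₁⟩⟩)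
          · exact Or.inr (Or.inr ⟨x, List.mem_append_right _ hxens,
              Or.inr ⟨a', ha'nb, (hP₁ext a').mpr ⟨hPa', ha'ne⟩, hr₁⟩⟩)

theorem pvBfsB_spec (img : List (List Int)) (N M : Nat) (lab : Int) (hlab : lab ≠ 0) :
    ∀ (fuel : Nat) (q : List (Int × Int)) (qi : Nat) (L : List (List Int)),
    pvSh N M L →
    (q.drop qi).length + pvU img N M L < fuel →
    (∀ s ∈ q.drop qi, pvInb (N : Int) (M : Int) s = true ∧ pvG L s.1 s.2 = lab) →
    pvSh N M (pvBfsB img (N : Int) (M : Int) lab fuel q qi L).2 ∧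
    (∀ d, pvInb (N : Int) (M : Int) d = true →
      ((∃ s ∈ q.drop qi, PvRB (fun y => pvCondB img L (N : Int) (M : Int) y = true) s d) →
        pvG (pvBfsB img (N : Int) (M : Int) lab fuel q qi L).2 d.1 d.2 = lab) ∧
      (¬ (∃ s ∈ q.drop qi, PvRB (fun y => pvCondB img L (N : Int) (M : Int) y = true) s d) →
        pvG (pvBfsB img (N : Int) (M : Int) lab fuel q qi L).2 d.1 d.2 = pvG L d.1 d.2)) := by
  intro fuel
  induction fuel with
  | zero => intro q qi L _ hbound _; omega
  | succ fuel ih =>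
    intro q qi L hsh hbound hqs
    by_cases hqi : qi < q.length
    · have hdrop : q.drop qi = q[qi] :: q.drop (qi + 1) := List.drop_eq_getElem_cons hqi
      set c : Int × Int := q[qi] with hc
      have hcget : q.getD qi (0, 0) = c := List.getD_eq_getElem q (0, 0) hqi
      have hcmem : c ∈ q.drop qi := by rw [hdrop]; exact List.mem_cons_self
      have hcinb : pvInb (N : Int) (M : Int) c = true := (hqs c hcmem).1
      have hclab : pvG L c.1 c.2 = lab := (hqs c hcmem).2
      set ens := (pvNbrs c).filter (pvCondB img L (N : Int) (M : Int)) with hens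
      have hfold := pvFoldNbrs img N M lab hlab (pvNbrs c) (pvNbrs_pairwise c) q L hsh
      have hstep : pvBfsB img (N : Int) (M : Int) lab (fuel + 1) q qi L =
          pvBfsB img (N : Int) (M : Int) lab fuel (q ++ ens) (qi + 1) (pvSetAll lab ens L) := by
        show (if qi < q.length then _ else (q, L)) = _
        rw [if_pos hqi]
        simp only [hcget, hfold, ← hens]
      rw [hstep]
      have hpw : ens.Pairwise (· ≠ ·) := (pvNbrs_pairwise c).filter _
      have hensinb : ∀ x ∈ ens, pvInb (N : Int) (M : Int) x = true :=
        fun x hx => ((pvCondB_iff _ _ _ _ _).mp (List.mem_filter.mp hx).2).1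
      obtain ⟨hsh₁, hchar⟩ := pvSetAll_spec img N M lab ens hpw hensinb L hsh
      have hdrop' : (q ++ ens).drop (qi + 1) = q.drop (qi + 1) ++ ens :=
        List.drop_append_of_le_length (by omega)
      have hensok : ∀ x ∈ ens, pvCondB img L (N : Int) (M : Int) x = true :=
        fun x hx => (List.mem_filter.mp hx).2
      have hU : pvU img N M L = pvU img N M (pvSetAll lab ens L) + ens.length :=
        pvU_setAll img N M lab hlab ens hpw L hsh hensok
      have hnotens : ∀ s ∈ q.drop (qi + 1), s ∉ ens := by
        intro s hs hsens
        have h0 : pvG L s.1 s.2 = 0 := ((pvCondB_iff _ _ _ _ _).mp (hensok s hsens)).2.1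
        have := (hqs s (by rw [hdrop]; exact List.mem_cons_of_mem _ hs)).2
        rw [h0] at this
        exact hlab this.symm
      have hqs' : ∀ s ∈ (q ++ ens).drop (qi + 1),
          pvInb (N : Int) (M : Int) s = true ∧ pvG (pvSetAll lab ens L) s.1 s.2 = lab := by
        intro s hs
        rw [hdrop'] at hs
        rcases List.mem_append.mp hs with hs' | hs'
        · have hmem : s ∈ q.drop qi := by rw [hdrop]; exact List.mem_cons_of_mem _ hs'
          obtain ⟨hinb, hval⟩ := hqs s hmem
          exact ⟨hinb, by rw [(hchar s hinb).2 (hnotens s hs')]; exact hval⟩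
        · exact ⟨hensinb s hs', (hchar s (hensinb s hs')).1 hs'⟩
      have hlen : (q.drop qi).length = (q.drop (qi + 1)).length + 1 := by
        rw [hdrop]; simp
      have hbound' : ((q ++ ens).drop (qi + 1)).length + pvU img N M (pvSetAll lab ens L) < fuel := by
        rw [hdrop', List.length_append]
        omega
      obtain ⟨ih1, ih2⟩ := ih (q ++ ens) (qi + 1) (pvSetAll lab ens L) hsh₁ hbound' hqs'
      refine ⟨ih1, ?_⟩
      intro d hd
      obtain ⟨hstepA, hstepB⟩ := pvRB_step img N M L hsh lab hlab c hcinb hclab (q.drop (qi + 1)) d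
      have hmemiff : ∀ (P : Int × Int → Prop),
          ((∃ s ∈ (q ++ ens).drop (qi + 1), PvRB P s d) ↔ (∃ s ∈ q.drop (qi + 1) ++ ens, PvRB P s d)) := by
        intro P
        rw [hdrop']
      constructor
      · intro hreach
        rw [hdrop] at hreach
        rcases hstepB hreach with heq | hdens | hex
        · by_cases hin : ∃ s ∈ (q ++ ens).drop (qi + 1),
              PvRB (fun y => pvCondB img (pvSetAll lab ens L) (N : Int) (M : Int) y = true) s d
          · exact (ih2 d hd).1 hin
          · rw [(ih2 d hd).2 hin]
            have hdnens : d ∉ ens := by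
              intro hdens
              have h0 : pvG L d.1 d.2 = 0 := ((pvCondB_iff _ _ _ _ _).mp (hensok d hdens)).2.1
              rw [heq, hclab] at h0
              exact hlab h0
            rw [(hchar d hd).2 hdnens, heq]
            exact hclab
        · have : ∃ s ∈ (q ++ ens).drop (qi + 1),
              PvRB (fun y => pvCondB img (pvSetAll lab ens L) (N : Int) (M : Int) y = true) s d :=
            (hmemiff _).mpr ⟨d, List.mem_append_right _ hdens, Or.inl rfl⟩
          exact (ih2 d hd).1 this
        · exact (ih2 d hd).1 ((hmemiff _).mpr hex)
      · intro hreach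
        rw [hdrop] at hreach
        have hdenc : d ∉ ens := by
          intro hdens
          exact hreach ⟨c, List.mem_cons_self,
            Or.inr ⟨d, (List.mem_filter.mp hdens).1, hensok d hdens, .refl d (hensok d hdens)⟩⟩
        have hnin : ¬ ∃ s ∈ (q ++ ens).drop (qi + 1),
            PvRB (fun y => pvCondB img (pvSetAll lab ens L) (N : Int) (M : Int) y = true) s d := by
          intro hin
          exact hreach (hstepA ((hmemiff _).mp hin))
        rw [(ih2 d hd).2 hnin, (hchar d hd).2 hdenc]
    · have hstep : pvBfsB img (N : Int) (M : Int) lab (fuel + 1) q qi L = (q, L) := by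
        show (if qi < q.length then _ else (q, L)) = _
        rw [if_neg hqi]
      rw [hstep]
      have hdropnil : q.drop qi = [] := List.drop_eq_nil_of_le (by omega)
      refine ⟨hsh, ?_⟩
      intro d hd
      rw [hdropnil]
      refine ⟨?_, fun _ => rfl⟩
      rintro ⟨s, hs, -⟩
      cases hs

theorem pvCondB_pvS_iff (img : List (List Int)) (N M : Nat) (L : List (List Int))
    (hsh : pvSh N M L) (c : Int × Int) (hcinb : pvInb (N : Int) (M : Int) c = true)
    (lab : Int) (hlab : lab ≠ 0) (y : Int × Int) :
    pvCondB img (pvS L c.1 c.2 lab) (N : Int) (M : Int) y = true ↔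
      (pvCondB img L (N : Int) (M : Int) y = true ∧ y ≠ c) := by
  by_cases hyc : y = c
  · subst hyc
    simp only [not_true, and_false, iff_false, ne_eq, not_not]
    intro hcontra
    have := ((pvCondB_iff _ _ _ _ _).mp hcontra).2.1
    rw [pvG_pvS_self N M L hsh y hcinb lab] at this
    exact hlab this
  · rw [pvCondB_pvS img N M L hsh c hcinb lab hlab y hyc]
    simp [hyc]

-- the same wavefront seen from A's flood fill and from B's BFS start
theorem pvReach_bridge (img : List (List Int)) (N M : Nat) (L : List (List Int))
    (hsh : pvSh N M L) (lab : Int) (hlab : lab ≠ 0)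
    (c : Int × Int) (hok : pvCondB img L (N : Int) (M : Int) c = true) (d : Int × Int) :
    PvReach (fun y => pvCondB img L (N : Int) (M : Int) y = true) c d ↔
      PvRB (fun y => pvCondB img (pvS L c.1 c.2 lab) (N : Int) (M : Int) y = true) c d := by
  have hcinb : pvInb (N : Int) (M : Int) c = true := ((pvCondB_iff _ _ _ _ _).mp hok).1
  have hiff := pvCondB_pvS_iff img N M L hsh c hcinb lab hlab
  constructor
  · intro h
    rcases PvReach.del (Q := fun y => y = c) h with rfl | ⟨a', ha'ne, hsrc, hr'⟩
    · exact Or.inl rfl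
    · have hr₁ := hr'.mono (fun y hy => (hiff y).mpr ⟨hy.1, hy.2⟩)
      rcases hsrc with rfl | ⟨x, rfl, ha'nb, hPa'⟩
      · exact absurd rfl ha'ne
      · exact Or.inr ⟨a', ha'nb, (hiff a').mpr ⟨hPa', ha'ne⟩, hr₁⟩
  · intro h
    rcases h with rfl | ⟨m, hm, hPm, hr⟩
    · exact .refl c hok
    · have hPmL : pvCondB img L (N : Int) (M : Int) m = true := ((hiff m).mp hPm).1
      have hrL : PvReach (fun y => pvCondB img L (N : Int) (M : Int) y = true) m d :=
        hr.mono (fun y hy => ((hiff y).mp hy).1)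
      exact PvReach.trans (PvReach.step c c m (.refl c hok) hm hPmL) hrL

def pvStepA (img : List (List Int)) (nl nc : Int) (fuel : Nat)
    (s : List (List Int) × Int × PySem.Dict Int (List Int)) (c : Int × Int) :
    List (List Int) × Int × PySem.Dict Int (List Int) :=
  if pvG img c.1 c.2 == 0 && pvG s.1 c.1 c.2 == 0 then
    let r := pvFloodA img nl nc s.2.1 fuel [c] s.1 1
    let cs := if s.2.2.contains r.2 then s.2.2.insert r.2 (s.2.2.getD r.2 [] ++ [s.2.1])
              else s.2.2.insert r.2 [s.2.1]
    (r.1, s.2.1 + 1, cs)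
  else s

def pvStepB (img : List (List Int)) (nl nc : Int) (fuel : Nat)
    (s : List (List Int) × Int) (c : Int × Int) : List (List Int) × Int :=
  if pvG img c.1 c.2 == 0 && pvG s.1 c.1 c.2 == 0 then
    ((pvBfsB img nl nc (s.2 + 1) fuel [c] 0 (pvS s.1 c.1 c.2 (s.2 + 1))).2, s.2 + 1)
  else s

-- the state invariant tying A's scan state to B's
def pvInv (img : List (List Int)) (N M : Nat)
    (sA : List (List Int) × Int × PySem.Dict Int (List Int))
    (sB : List (List Int) × Int) : Prop :=
  sA.1 = sB.1 ∧ pvSh N M sB.1 ∧ sA.2.1 = sB.2 + 1 ∧ 0 ≤ sB.2 ∧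
  (∀ c : Int × Int, pvInb (N : Int) (M : Int) c = true →
    pvG sB.1 c.1 c.2 = 0 ∨ (1 ≤ pvG sB.1 c.1 c.2 ∧ pvG sB.1 c.1 c.2 ≤ sB.2)) ∧
  sA.2.2.keys.Nodup ∧
  (∀ sz l : Int, l ∈ sA.2.2.getD sz [] ↔
    (1 ≤ l ∧ l ≤ sB.2 ∧ sz = (pvCnt N M sB.1 l : Int) + 1))

theorem pvStep_inv (img : List (List Int)) (N M : Nat)
    (sA : List (List Int) × Int × PySem.Dict Int (List Int))
    (sB : List (List Int) × Int) (c : Int × Int)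
    (hcinb : pvInb (N : Int) (M : Int) c = true)
    (hinv : pvInv img N M sA sB) :
    pvInv img N M (pvStepA img (N : Int) (M : Int) (5 * N * M + 2) sA c)
      (pvStepB img (N : Int) (M : Int) (N * M + 1) sB c) := by
  obtain ⟨hLeq, hsh, hcl, hcl0, hent, hnd, hcs⟩ := hinv
  by_cases hcond : (pvG img c.1 c.2 == 0 && pvG sB.1 c.1 c.2 == 0) = true
  · -- a new component is flooded from c
    set L := sB.1 with hLdef
    set lab := sB.2 + 1 with hlabdef
    have hlab : lab ≠ 0 := by omega
    have hok : pvCondB img L (N : Int) (M : Int) c = true := by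
      rw [pvCondB_iff]
      simp only [Bool.and_eq_true, beq_iff_eq] at hcond
      exact ⟨hcinb, hcond.2, hcond.1⟩
    have hstepA : pvStepA img (N : Int) (M : Int) (5 * N * M + 2) sA c =
        ((pvFloodA img (N : Int) (M : Int) lab (5 * N * M + 2) [c] L 1).1, lab + 1,
          if sA.2.2.contains (pvFloodA img (N : Int) (M : Int) lab (5 * N * M + 2) [c] L 1).2 then
            sA.2.2.insert (pvFloodA img (N : Int) (M : Int) lab (5 * N * M + 2) [c] L 1).2
              (sA.2.2.getD (pvFloodA img (N : Int) (M : Int) lab (5 * N * M + 2) [c] L 1).2 [] ++ [lab])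
          else sA.2.2.insert (pvFloodA img (N : Int) (M : Int) lab (5 * N * M + 2) [c] L 1).2 [lab]) := by
      rw [pvStepA, if_pos (by rw [hLeq]; exact hcond)]
      rw [hLeq, hcl]
    have hstepB : pvStepB img (N : Int) (M : Int) (N * M + 1) sB c =
        ((pvBfsB img (N : Int) (M : Int) lab (N * M + 1) [c] 0 (pvS L c.1 c.2 lab)).2, lab) := by
      rw [pvStepB, if_pos hcond]
    have hUle : pvU img N M L ≤ N * M := by
      unfold pvU
      have := List.countP_le_length (p := pvCondB img L (N : Int) (M : Int)) (l := pvCells N M)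
      rwa [length_pvCells] at this
    have hUpos : 1 ≤ pvU img N M L := by
      unfold pvU
      have : 0 < (pvCells N M).countP (pvCondB img L (N : Int) (M : Int)) :=
        List.countP_pos_iff.mpr ⟨c, (mem_pvCells N M c).mpr hcinb, hok⟩
      omega
    obtain ⟨hshA, hcharA, hsizeA⟩ := pvFloodA_spec img N M lab hlab (5 * N * M + 2) [c] L 1 hsh
      (by intro s hs; rw [List.mem_singleton] at hs; subst hs; exact hcinb)
      (by
        simp only [List.length_singleton]
        have h5 : 5 * N * M = 5 * (N * M) := by ring
        omega)
    have hshL₁ : pvSh N M (pvS L c.1 c.2 lab) := pvSh_pvS N M L hsh c.1 c.2 lab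
    have hU₁ : pvU img N M L = pvU img N M (pvS L c.1 c.2 lab) + 1 :=
      pvU_pvS img N M L hsh c hok lab hlab
    obtain ⟨hshB, hcharB⟩ := pvBfsB_spec img N M lab hlab (N * M + 1) [c] 0 (pvS L c.1 c.2 lab) hshL₁
      (by simp only [List.drop_zero, List.length_singleton]; omega)
      (by
        intro s hs
        rw [List.drop_zero, List.mem_singleton] at hs
        subst hs
        exact ⟨hcinb, pvG_pvS_self N M L hsh _ hcinb lab⟩)
    set LA := (pvFloodA img (N : Int) (M : Int) lab (5 * N * M + 2) [c] L 1).1 with hLAdef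
    set LB := (pvBfsB img (N : Int) (M : Int) lab (N * M + 1) [c] 0 (pvS L c.1 c.2 lab)).2 with hLBdef
    -- the two matrices agree pointwise
    have hmain : ∀ d : Int × Int, pvInb (N : Int) (M : Int) d = true →
        (PvReach (fun y => pvCondB img L (N : Int) (M : Int) y = true) c d →
          pvG LA d.1 d.2 = lab ∧ pvG LB d.1 d.2 = lab) ∧
        (¬ PvReach (fun y => pvCondB img L (N : Int) (M : Int) y = true) c d →
          pvG LA d.1 d.2 = pvG L d.1 d.2 ∧ pvG LB d.1 d.2 = pvG L d.1 d.2) := by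
      intro d hd
      have hbr := pvReach_bridge img N M L hsh lab hlab c hok d
      constructor
      · intro hreach
        refine ⟨(hcharA d hd).1 ⟨c, List.mem_cons_self, hreach⟩, ?_⟩
        have := (hcharB d hd).1 ⟨c, by rw [List.drop_zero]; exact List.mem_singleton.mpr rfl, hbr.mp hreach⟩
        simpa using this
      · intro hreach
        have hdc : d ≠ c := by
          rintro rfl
          exact hreach (.refl d hok)
        refine ⟨(hcharA d hd).2 ?_, ?_⟩
        · rintro ⟨s, hs, hr⟩
          rw [List.mem_singleton] at hs
          subst hs
          exact hreach hr
        · have hnb : ¬ ∃ s ∈ ([c].drop 0),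
              PvRB (fun y => pvCondB img (pvS L c.1 c.2 lab) (N : Int) (M : Int) y = true) s d := by
            rintro ⟨s, hs, hr⟩
            rw [List.drop_zero, List.mem_singleton] at hs
            subst hs
            exact hreach (hbr.mpr hr)
          rw [(hcharB d hd).2 hnb]
          exact pvG_pvS_ne N M L c d hcinb hd hdc lab
    have hMeq : LA = LB := by
      apply pvMatExt N M LA LB hshA hshB
      intro d hd
      by_cases hreach : PvReach (fun y => pvCondB img L (N : Int) (M : Int) y = true) c d
      · rw [((hmain d hd).1 hreach).1, ((hmain d hd).1 hreach).2]
      · rw [((hmain d hd).2 hreach).1, ((hmain d hd).2 hreach).2]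
    -- the flood's character, restated for count stability
    have hchange : ∀ d : Int × Int, pvInb (N : Int) (M : Int) d = true →
        pvG LA d.1 d.2 = pvG L d.1 d.2 ∨ (pvG L d.1 d.2 = 0 ∧ pvG LA d.1 d.2 = lab) := by
      intro d hd
      by_cases hreach : PvReach (fun y => pvCondB img L (N : Int) (M : Int) y = true) c d
      · right
        have hP := hreach.dst
        exact ⟨((pvCondB_iff _ _ _ _ _).mp hP).2.1, ((hmain d hd).1 hreach).1⟩
      · left
        exact ((hmain d hd).2 hreach).1
    have hcnt0 : pvCnt N M L lab = 0 := by
      unfold pvCnt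
      rw [List.countP_eq_zero]
      intro d hd
      rcases hent d ((mem_pvCells N M d).mp hd) with h0 | ⟨h1, h2⟩
      · simp [h0]; omega
      · simp; omega
    have hsize : (pvFloodA img (N : Int) (M : Int) lab (5 * N * M + 2) [c] L 1).2 =
        (pvCnt N M LA lab : Int) + 1 := by
      rw [hsizeA, hcnt0]
      push_cast
      ring
    have hstab : ∀ l : Int, 1 ≤ l → l ≤ sB.2 → pvCnt N M LA l = pvCnt N M L l := by
      intro l h1 h2
      exact pvCnt_stable N M L LA lab l (by omega) (by omega) hchange
    -- assemble the invariant
    rw [hstepA, hstepB]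
    have hcs' : (if sA.2.2.contains (pvFloodA img (N : Int) (M : Int) lab (5 * N * M + 2) [c] L 1).2 then
          sA.2.2.insert (pvFloodA img (N : Int) (M : Int) lab (5 * N * M + 2) [c] L 1).2
            (sA.2.2.getD (pvFloodA img (N : Int) (M : Int) lab (5 * N * M + 2) [c] L 1).2 [] ++ [lab])
        else sA.2.2.insert (pvFloodA img (N : Int) (M : Int) lab (5 * N * M + 2) [c] L 1).2 [lab]) =
        sA.2.2.insert ((pvCnt N M LA lab : Int) + 1)
          (sA.2.2.getD ((pvCnt N M LA lab : Int) + 1) [] ++ [lab]) := by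
      rw [hsize]
      by_cases hcont : sA.2.2.contains ((pvCnt N M LA lab : Int) + 1) = true
      · rw [if_pos hcont]
      · rw [if_neg (by simpa using hcont)]
        rw [PySem.Dict.getD_of_not_contains sA.2.2 [] (by simpa using hcont)]
        simp
    rw [hcs']
    refine ⟨hMeq, ?_, ?_, ?_, ?_, ?_, ?_⟩
    · dsimp only
      exact hMeq ▸ hshA
    · dsimp only
    · dsimp only
      omega
    · dsimp only
      intro d hd
      rcases hchange d hd with h | ⟨h0, h1⟩
      · rcases hent d hd with h' | ⟨h1', h2'⟩
        · left
          rw [← hMeq, h, h']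
        · right
          rw [← hMeq, h]
          omega
      · right
        rw [← hMeq, h1]
        omega
    · dsimp only
      exact PySem.Dict.nodup_keys_insert _ _ _ hnd
    · dsimp only
      intro sz l
      rw [PySem.Dict.getD_insert]
      by_cases hsz : sz = (pvCnt N M LA lab : Int) + 1
      · rw [if_pos hsz]
        rw [List.mem_append, List.mem_singleton]
        constructor
        · rintro (hold | rfl)
          · obtain ⟨h1, h2, h3⟩ := (hcs _ l).mp hold
            refine ⟨h1, by omega, ?_⟩
            rw [← hMeq, hsz, hstab l h1 h2, ← h3]
          · refine ⟨by omega, by omega, ?_⟩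
            rw [← hMeq, hsz]
        · rintro ⟨h1, h2, h3⟩
          by_cases hllab : l = lab
          · right; exact hllab
          · left
            have h2' : l ≤ sB.2 := by omega
            have hkey : ((pvCnt N M LA lab : Int) + 1) = (pvCnt N M L l : Int) + 1 := by
              rw [← hsz, h3, ← hMeq, hstab l h1 h2']
            rw [hkey]
            exact (hcs _ l).mpr ⟨h1, h2', rfl⟩
      · rw [if_neg hsz]
        rw [hcs sz l]
        constructor
        · rintro ⟨h1, h2, h3⟩
          refine ⟨h1, by omega, ?_⟩
          rw [← hMeq, hstab l h1 h2, ← h3]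
        · rintro ⟨h1, h2, h3⟩
          by_cases hllab : l = lab
          · exfalso
            apply hsz
            rw [h3, hllab, ← hMeq]
          · have h2' : l ≤ sB.2 := by omega
            refine ⟨h1, h2', ?_⟩
            rw [h3, ← hMeq, hstab l h1 h2']
  · have hA : pvStepA img (N : Int) (M : Int) (5 * N * M + 2) sA c = sA := by
      rw [pvStepA, if_neg (by rw [hLeq]; exact hcond)]
    have hB : pvStepB img (N : Int) (M : Int) (N * M + 1) sB c = sB := by
      rw [pvStepB, if_neg hcond]
    rw [hA, hB]
    exact ⟨hLeq, hsh, hcl, hcl0, hent, hnd, hcs⟩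

theorem pvScan_inv (img : List (List Int)) (N M : Nat) :
    ∀ (cs : List (Int × Int)), (∀ c ∈ cs, pvInb (N : Int) (M : Int) c = true) →
    ∀ sA sB, pvInv img N M sA sB →
    pvInv img N M (cs.foldl (pvStepA img (N : Int) (M : Int) (5 * N * M + 2)) sA)
      (cs.foldl (pvStepB img (N : Int) (M : Int) (N * M + 1)) sB) := by
  intro cs
  induction cs with
  | nil => intro _ sA sB h; exact h
  | cons c cs ih =>
    intro hin sA sB h
    rw [List.foldl_cons, List.foldl_cons]
    exact ih (fun x hx => hin x (List.mem_cons_of_mem _ hx))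
      _ _ (pvStep_inv img N M sA sB c (hin c List.mem_cons_self) h)

theorem pvFoldl_flatMap {α β γ : Type} (g : α → List β) (f : γ → β → γ) :
    ∀ (l : List α) (init : γ),
    (l.flatMap g).foldl f init = l.foldl (fun a x => (g x).foldl f a) init := by
  intro l
  induction l with
  | nil => intro init; rfl
  | cons x l ih => intro init; rw [List.flatMap_cons, List.foldl_append, List.foldl_cons, ih]

theorem pvScanA_cells (img : List (List Int)) (fuel : Nat) :
    pvScanA img (img.length : Int) ((img.headD []).length : Int) fuel =
      (pvCells img.length (img.headD []).length).foldl
        (pvStepA img (img.length : Int) ((img.headD []).length : Int) fuel)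
        (List.replicate img.length (List.replicate (img.headD []).length 0), 1, PySem.Dict.empty) := by
  unfold pvScanA pvCells
  rw [pvFoldl_flatMap]
  simp only [List.foldl_map]
  rfl

theorem pvScanB_cells (img : List (List Int)) (fuel : Nat) :
    pvScanB img (img.length : Int) ((img.headD []).length : Int) fuel =
      (pvCells img.length (img.headD []).length).foldl
        (pvStepB img (img.length : Int) ((img.headD []).length : Int) fuel)
        (List.replicate img.length (List.replicate (img.headD []).length 0), 0) := by
  unfold pvScanB pvCells
  rw [pvFoldl_flatMap]
  simp only [List.foldl_map]
  rfl

theorem pvZeroPass_cells (N M : Nat) (lab : Int) (L : List (List Int)) :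
    pvZeroPass (N : Int) (M : Int) lab L =
      (pvCells N M).foldl (fun L c => if pvG L c.1 c.2 == lab then pvS L c.1 c.2 0 else L) L := by
  unfold pvZeroPass pvCells
  rw [pvFoldl_flatMap]
  simp only [List.foldl_map, Int.toNat_natCast]

theorem pvPassFold_spec (N M : Nat) (lab : Int) :
    ∀ (cs : List (Int × Int)), cs.Nodup → (∀ x ∈ cs, pvInb (N : Int) (M : Int) x = true) →
    ∀ L, pvSh N M L →
    pvSh N M (cs.foldl (fun L c => if pvG L c.1 c.2 == lab then pvS L c.1 c.2 0 else L) L) ∧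
    (∀ d, pvInb (N : Int) (M : Int) d = true →
      (d ∈ cs → pvG (cs.foldl (fun L c => if pvG L c.1 c.2 == lab then pvS L c.1 c.2 0 else L) L) d.1 d.2
        = if pvG L d.1 d.2 == lab then 0 else pvG L d.1 d.2) ∧
      (d ∉ cs → pvG (cs.foldl (fun L c => if pvG L c.1 c.2 == lab then pvS L c.1 c.2 0 else L) L) d.1 d.2
        = pvG L d.1 d.2)) := by
  intro cs
  induction cs with
  | nil =>
    intro _ _ L hsh
    exact ⟨hsh, fun d _ => ⟨fun h => absurd h (List.not_mem_nil), fun _ => rfl⟩⟩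
  | cons e cs ih =>
    intro hnd hinb L hsh
    have hnd' := (List.nodup_cons.mp hnd).2
    have hnmem := (List.nodup_cons.mp hnd).1
    have heinb : pvInb (N : Int) (M : Int) e = true := hinb e List.mem_cons_self
    have hsh₁ : pvSh N M (if pvG L e.1 e.2 == lab then pvS L e.1 e.2 0 else L) := by
      split
      · exact pvSh_pvS N M L hsh e.1 e.2 0
      · exact hsh
    have hstep_at : pvG (if pvG L e.1 e.2 == lab then pvS L e.1 e.2 0 else L) e.1 e.2
        = if pvG L e.1 e.2 == lab then 0 else pvG L e.1 e.2 := by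
      split
      · exact pvG_pvS_self N M L hsh e heinb 0
      · rfl
    have hstep_ne : ∀ d, pvInb (N : Int) (M : Int) d = true → d ≠ e →
        pvG (if pvG L e.1 e.2 == lab then pvS L e.1 e.2 0 else L) d.1 d.2 = pvG L d.1 d.2 := by
      intro d hd hde
      split
      · exact pvG_pvS_ne N M L e d heinb hd hde 0
      · rfl
    obtain ⟨ihsh, ihc⟩ := ih hnd' (fun x hx => hinb x (List.mem_cons_of_mem _ hx)) _ hsh₁
    rw [List.foldl_cons]
    refine ⟨ihsh, ?_⟩
    intro d hd
    constructor
    · intro hmem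
      rcases List.mem_cons.mp hmem with rfl | hmem'
      · rw [(ihc d hd).2 hnmem, hstep_at]
      · rw [(ihc d hd).1 hmem', hstep_ne d hd (fun h => hnmem (h ▸ hmem'))]
    · intro hnm
      rw [(ihc d hd).2 (fun h => hnm (List.mem_cons_of_mem _ h)),
        hstep_ne d hd (fun h => hnm (h ▸ List.mem_cons_self))]

theorem pvZeroPass_spec (N M : Nat) (lab : Int) (L : List (List Int)) (hsh : pvSh N M L) :
    pvSh N M (pvZeroPass (N : Int) (M : Int) lab L) ∧
    (∀ d, pvInb (N : Int) (M : Int) d = true →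
      pvG (pvZeroPass (N : Int) (M : Int) lab L) d.1 d.2
        = if pvG L d.1 d.2 == lab then 0 else pvG L d.1 d.2) := by
  rw [pvZeroPass_cells]
  obtain ⟨h1, h2⟩ := pvPassFold_spec N M lab (pvCells N M) (nodup_pvCells N M)
    (fun x hx => (mem_pvCells N M x).mp hx) L hsh
  exact ⟨h1, fun d hd => (h2 d hd).1 ((mem_pvCells N M d).mpr hd)⟩

theorem pvLabsFold_spec (N M : Nat) :
    ∀ (ls : List Int), (0 : Int) ∉ ls → ∀ L, pvSh N M L →
    pvSh N M (ls.foldl (fun L lab => pvZeroPass (N : Int) (M : Int) lab L) L) ∧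
    (∀ d, pvInb (N : Int) (M : Int) d = true →
      pvG (ls.foldl (fun L lab => pvZeroPass (N : Int) (M : Int) lab L) L) d.1 d.2
        = if pvG L d.1 d.2 ∈ ls then 0 else pvG L d.1 d.2) := by
  intro ls
  induction ls with
  | nil => intro _ L hsh; exact ⟨hsh, fun d _ => by simp⟩
  | cons l ls ih =>
    intro h0 L hsh
    have hl0 : l ≠ 0 := fun h => h0 (h ▸ List.mem_cons_self)
    have h0' : (0 : Int) ∉ ls := fun h => h0 (List.mem_cons_of_mem _ h)
    obtain ⟨hsh₁, hchar₁⟩ := pvZeroPass_spec N M l L hsh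
    obtain ⟨ihsh, ihc⟩ := ih h0' _ hsh₁
    rw [List.foldl_cons]
    refine ⟨ihsh, ?_⟩
    intro d hd
    rw [ihc d hd, hchar₁ d hd]
    by_cases hveq : pvG L d.1 d.2 = l
    · simp only [hveq, beq_self_eq_true, if_true, List.mem_cons]
      have : (0 : Int) ∉ ls := h0'
      simp [Ne.symm hl0, this]
    · have : (pvG L d.1 d.2 == l) = false := by simp [hveq]
      rw [this]
      simp only [Bool.false_eq_true, if_false, List.mem_cons]
      by_cases hmem : pvG L d.1 d.2 ∈ ls
      · simp [hmem]
      · simp [hmem, hveq]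

theorem pvFilterA_spec (N M : Nat) :
    ∀ (its : List (Int × List Int)), (∀ p ∈ its, (0 : Int) ∉ p.2) → ∀ L, pvSh N M L →
    pvSh N M (its.foldl (fun L p => if p.1 < 100 then
      p.2.foldl (fun L lab => pvZeroPass (N : Int) (M : Int) lab L) L else L) L) ∧
    (∀ d, pvInb (N : Int) (M : Int) d = true →
      pvG (its.foldl (fun L p => if p.1 < 100 then
        p.2.foldl (fun L lab => pvZeroPass (N : Int) (M : Int) lab L) L else L) L) d.1 d.2
      = if (∃ p ∈ its, p.1 < 100 ∧ pvG L d.1 d.2 ∈ p.2) then 0 else pvG L d.1 d.2) := by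
  intro its
  induction its with
  | nil => intro _ L hsh; exact ⟨hsh, fun d _ => by simp⟩
  | cons p its ih =>
    intro h0 L hsh
    have h0p : (0 : Int) ∉ p.2 := h0 p List.mem_cons_self
    have h0' : ∀ q ∈ its, (0 : Int) ∉ q.2 := fun q hq => h0 q (List.mem_cons_of_mem _ hq)
    rw [List.foldl_cons]
    by_cases hlt : p.1 < 100
    · rw [if_pos hlt]
      obtain ⟨hsh₁, hchar₁⟩ := pvLabsFold_spec N M p.2 h0p L hsh
      obtain ⟨ihsh, ihc⟩ := ih h0' _ hsh₁
      refine ⟨ihsh, ?_⟩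
      intro d hd
      rw [ihc d hd, hchar₁ d hd]
      by_cases hveq : pvG L d.1 d.2 ∈ p.2
      · rw [if_pos hveq]
        have hz : ¬ ∃ q ∈ its, q.1 < 100 ∧ (0 : Int) ∈ q.2 := by
          rintro ⟨q, hq, -, hq0⟩
          exact h0' q hq hq0
        rw [if_neg hz, if_pos ⟨p, List.mem_cons_self, hlt, hveq⟩]
      · rw [if_neg hveq]
        by_cases hex : ∃ q ∈ its, q.1 < 100 ∧ pvG L d.1 d.2 ∈ q.2
        · rw [if_pos hex, if_pos ?_]
          obtain ⟨q, hq, hqlt, hqmem⟩ := hex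
          exact ⟨q, List.mem_cons_of_mem _ hq, hqlt, hqmem⟩
        · rw [if_neg hex, if_neg ?_]
          rintro ⟨q, hq, hqlt, hqmem⟩
          rcases List.mem_cons.mp hq with rfl | hq'
          · exact hveq hqmem
          · exact hex ⟨q, hq', hqlt, hqmem⟩
    · rw [if_neg hlt]
      obtain ⟨ihsh, ihc⟩ := ih h0' L hsh
      refine ⟨ihsh, ?_⟩
      intro d hd
      rw [ihc d hd]
      by_cases hex : ∃ q ∈ its, q.1 < 100 ∧ pvG L d.1 d.2 ∈ q.2
      · rw [if_pos hex, if_pos ?_]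
        obtain ⟨q, hq, hqlt, hqmem⟩ := hex
        exact ⟨q, List.mem_cons_of_mem _ hq, hqlt, hqmem⟩
      · rw [if_neg hex, if_neg ?_]
        rintro ⟨q, hq, hqlt, hqmem⟩
        rcases List.mem_cons.mp hq with rfl | hq'
        · exact hlt hqlt
        · exact hex ⟨q, hq', hqlt, hqmem⟩

def pvMcount (v : Int) (rows : List (List Int)) : Nat := (rows.map (·.count v)).sum

theorem pvCountsRow_spec (v₀ : Int) :
    ∀ (vs : List Int) (d : PySem.Dict Int Int), d.keys.Nodup →
    (vs.foldl (fun d v => if v != 0 then d.insert v (d.getD v 0 + 1) else d) d).keys.Nodup ∧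
    (v₀ ≠ 0 → (vs.foldl (fun d v => if v != 0 then d.insert v (d.getD v 0 + 1) else d) d).getD v₀ 0
      = d.getD v₀ 0 + vs.count v₀) ∧
    (v₀ ≠ 0 → ((vs.foldl (fun d v => if v != 0 then d.insert v (d.getD v 0 + 1) else d) d).contains v₀ = true
      ↔ (d.contains v₀ = true ∨ 0 < vs.count v₀))) ∧
    (∀ z : Int, (vs.foldl (fun d v => if v != 0 then d.insert v (d.getD v 0 + 1) else d) d).getD 0 z
      = d.getD 0 z) := by
  intro vs
  induction vs with
  | nil => intro d hnd; exact ⟨hnd, fun _ => by simp, fun _ => by simp, fun z => rfl⟩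
  | cons v vs ih =>
    intro d hnd
    rw [List.foldl_cons]
    by_cases hv : v = 0
    · subst hv
      have : ((0 : Int) != 0) = false := by simp
      rw [this]
      simp only [Bool.false_eq_true, if_false]
      obtain ⟨ih1, ih2, ih3, ih4⟩ := ih d hnd
      refine ⟨ih1, ?_, ?_, ih4⟩
      · intro h0
        rw [ih2 h0, List.count_cons]
        simp [Ne.symm h0]
      · intro h0
        rw [ih3 h0, List.count_cons]
        simp [Ne.symm h0]
    · have : (v != 0) = true := by simp [hv]
      rw [this]
      simp only [if_true]
      obtain ⟨ih1, ih2, ih3, ih4⟩ := ih (d.insert v (d.getD v 0 + 1))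
        (PySem.Dict.nodup_keys_insert _ _ _ hnd)
      refine ⟨ih1, ?_, ?_, ?_⟩
      · intro h0
        rw [ih2 h0, PySem.Dict.getD_insert, List.count_cons]
        by_cases hev : v₀ = v
        · subst hev
          simp
          omega
        · rw [if_neg hev]
          simp [Ne.symm hev]
      · intro h0
        rw [ih3 h0, PySem.Dict.contains_insert, List.count_cons]
        by_cases hev : v₀ = v
        · subst hev
          simp
        · simp only [beq_iff_eq, hev, Bool.false_or]
          simp [Ne.symm hev]
          constructor
          · rintro ((rfl | h) | h)
            · exact absurd rfl hev
            · exact Or.inl h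
            · exact Or.inr h
          · rintro (h | h)
            · exact Or.inl (Or.inr h)
            · exact Or.inr h
      · intro z
        rw [ih4 z, PySem.Dict.getD_insert, if_neg (Ne.symm hv)]

theorem pvCounts_spec (v₀ : Int) :
    ∀ (rows : List (List Int)) (d : PySem.Dict Int Int), d.keys.Nodup →
    ((rows.foldl (fun d row => row.foldl (fun d v => if v != 0 then d.insert v (d.getD v 0 + 1) else d) d) d)).keys.Nodup ∧
    (v₀ ≠ 0 → (rows.foldl (fun d row => row.foldl (fun d v => if v != 0 then d.insert v (d.getD v 0 + 1) else d) d) d).getD v₀ 0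
      = d.getD v₀ 0 + pvMcount v₀ rows) ∧
    (v₀ ≠ 0 → ((rows.foldl (fun d row => row.foldl (fun d v => if v != 0 then d.insert v (d.getD v 0 + 1) else d) d) d).contains v₀ = true
      ↔ (d.contains v₀ = true ∨ 0 < pvMcount v₀ rows))) ∧
    (∀ z : Int, (rows.foldl (fun d row => row.foldl (fun d v => if v != 0 then d.insert v (d.getD v 0 + 1) else d) d) d).getD 0 z
      = d.getD 0 z) := by
  intro rows
  induction rows with
  | nil => intro d hnd; exact ⟨hnd, fun _ => by simp [pvMcount], fun _ => by simp [pvMcount], fun z => rfl⟩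
  | cons r rows ih =>
    intro d hnd
    rw [List.foldl_cons]
    obtain ⟨rh1, rh2, rh3, rh4⟩ := pvCountsRow_spec v₀ r d hnd
    obtain ⟨ih1, ih2, ih3, ih4⟩ := ih _ rh1
    have hmadd : pvMcount v₀ (r :: rows) = r.count v₀ + pvMcount v₀ rows := by
      simp [pvMcount]
    refine ⟨ih1, ?_, ?_, ?_⟩
    · intro h0
      rw [ih2 h0, rh2 h0, hmadd]
      push_cast
      ring
    · intro h0
      rw [ih3 h0, rh3 h0, hmadd]
      constructor
      · rintro ((h | h) | h)
        · exact Or.inl h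
        · right; omega
        · right; omega
      · rintro (h | h)
        · exact Or.inl (Or.inl h)
        · rcases Nat.lt_or_ge 0 (r.count v₀) with hc | hc
          · exact Or.inl (Or.inr hc)
          · right; omega
    · intro z
      rw [ih4 z, rh4 z]

theorem pvCount_eq_countP_range (v : Int) :
    ∀ (r : List Int), r.count v = (List.range r.length).countP (fun j => r.getD j 0 == v) := by
  intro r
  induction r with
  | nil => simp
  | cons a r ih =>
    rw [List.length_cons, List.range_succ_eq_map, List.countP_cons, List.countP_map]
    simp only [Function.comp_def, List.getD_cons_succ, List.getD_cons_zero]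
    rw [List.count_cons, ih]

theorem pvCells_succ (N M : Nat) :
    pvCells (N + 1) M = ((List.range M).map fun (j : Nat) => ((0 : Int), (j : Int))) ++
      (pvCells N M).map (fun c => (c.1 + 1, c.2)) := by
  unfold pvCells
  rw [List.range_succ_eq_map, List.flatMap_cons]
  have htail : (List.flatMap (fun (i : Nat) => (List.range M).map fun (j : Nat) => ((i : Int), (j : Int)))
      ((List.range N).map Nat.succ)) =
      ((List.range N).flatMap fun (i : Nat) => (List.range M).map fun (j : Nat) => ((i : Int), (j : Int))).map
        (fun c => (c.1 + 1, c.2)) := by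
    rw [List.flatMap_map, List.map_flatMap]
    apply List.flatMap_congr
    intro i hi
    rw [List.map_map]
    apply List.map_congr_left
    intro j hj
    simp [Function.comp_def]
  rw [htail]
  norm_num

theorem pvMcount_cnt (v : Int) :
    ∀ (L : List (List Int)) (M : Nat), (∀ r ∈ L, r.length = M) →
    pvMcount v L = pvCnt L.length M L v := by
  intro L
  induction L with
  | nil => intro M _; simp [pvMcount, pvCnt, pvCells]
  | cons r L ih =>
    intro M hM
    have hrM : r.length = M := hM r List.mem_cons_self
    rw [List.length_cons]
    unfold pvCnt
    rw [pvCells_succ, List.countP_append]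
    have h1 : ((List.range M).map fun (j : Nat) => ((0 : Int), (j : Int))).countP
        (fun c => pvG (r :: L) c.1 c.2 == v) = r.count v := by
      rw [List.countP_map, pvCount_eq_countP_range v r, hrM]
      apply List.countP_congr
      intro j hj
      simp only [Function.comp_def, pvG]
      norm_num
    have h2 : ((pvCells L.length M).map (fun c => (c.1 + 1, c.2))).countP
        (fun c => pvG (r :: L) c.1 c.2 == v) =
        pvCnt L.length M L v := by
      rw [List.countP_map]
      unfold pvCnt
      apply List.countP_congr
      intro c hc
      have hcinb := (mem_pvCells _ _ c).mp hc
      rw [pvInb_iff] at hcinb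
      simp only [Function.comp_def, pvG]
      have hts : (c.1 + 1).toNat = c.1.toNat + 1 := by omega
      rw [hts]
      simp
    rw [h1, h2, ← ih M (fun r' hr' => hM r' (List.mem_cons_of_mem _ hr'))]
    simp [pvMcount]

theorem pvSh_replicate (N M : Nat) :
    pvSh N M (List.replicate N (List.replicate M (0 : Int))) := by
  refine ⟨List.length_replicate, ?_⟩
  intro r hr
  rw [List.eq_of_mem_replicate hr]
  exact List.length_replicate

theorem pvG_replicate (N M : Nat) (i j : Int) :
    pvG (List.replicate N (List.replicate M (0 : Int))) i j = 0 := by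
  unfold pvG
  by_cases hi : i.toNat < N
  · rw [List.getD_eq_getElem _ [] (by simpa using hi), List.getElem_replicate]
    by_cases hj : j.toNat < M
    · rw [List.getD_eq_getElem _ 0 (by simpa using hj), List.getElem_replicate]
    · rw [List.getD_eq_default _ _ (by simpa using hj)]
  · have h : (List.replicate N (List.replicate M (0 : Int))).getD i.toNat [] = [] :=
      List.getD_eq_default _ _ (by simpa using hi)
    rw [h]
    simp

theorem pvSh_map (N M : Nat) (L : List (List Int)) (h : pvSh N M L) (f : Int → Int) :
    pvSh N M (L.map fun row => row.map f) := by
  obtain ⟨hN, hM⟩ := h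
  refine ⟨by simpa using hN, ?_⟩
  intro r hr
  obtain ⟨r₀, hr₀, rfl⟩ := List.mem_map.mp hr
  simpa using hM r₀ hr₀

theorem pvG_map (N M : Nat) (L : List (List Int)) (h : pvSh N M L) (f : Int → Int)
    (d : Int × Int) (hd : pvInb (N : Int) (M : Int) d = true) :
    pvG (L.map fun row => row.map f) d.1 d.2 = f (pvG L d.1 d.2) := by
  obtain ⟨hN, hM⟩ := h
  rw [pvInb_iff] at hd
  have hi : d.1.toNat < L.length := by omega
  have hrow : (L.getD d.1.toNat []).length = M := by
    rw [List.getD_eq_getElem L [] hi]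
    exact hM _ (List.getElem_mem hi)
  have hj : d.2.toNat < (L.getD d.1.toNat []).length := by omega
  unfold pvG
  have h1 : (L.map fun row => row.map f).getD d.1.toNat [] = (L.getD d.1.toNat []).map f := by
    rw [List.getD_eq_getElem _ [] (by simpa using hi), List.getElem_map, List.getD_eq_getElem L [] hi]
  rw [h1]
  rw [List.getD_eq_getElem _ 0 (by rw [List.length_map]; exact hj), List.getElem_map,
    List.getD_eq_getElem _ 0 hj]

theorem pv_main (img : List (List Int)) :
    rotulacao_componentes_conexos img = rotulacao_componentes_conexos_alt img := by
  unfold rotulacao_componentes_conexos rotulacao_componentes_conexos_alt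
  set N := img.length with hN
  set M := (img.headD []).length with hM
  have hA := pvScanA_cells img (5 * N * M + 2)
  have hB := pvScanB_cells img (N * M + 1)
  have hinv0 : pvInv img N M
      (List.replicate N (List.replicate M 0), 1, PySem.Dict.empty)
      (List.replicate N (List.replicate M 0), 0) := by
    refine ⟨rfl, pvSh_replicate N M, rfl, le_refl _, ?_, ?_, ?_⟩
    · intro c _
      left
      exact pvG_replicate N M c.1 c.2
    · rw [PySem.Dict.keys_empty]
      exact List.nodup_nil
    · intro sz l
      rw [PySem.Dict.getD_empty]
      simp only [List.not_mem_nil, false_iff, not_and]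
      intro h1 h2
      omega
  have hinv := pvScan_inv img N M (pvCells N M) (fun c hc => (mem_pvCells N M c).mp hc)
    _ _ hinv0
  rw [← hA, ← hB] at hinv
  obtain ⟨hLeq, hsh, hcl, hcl0, hent, hnd, hcs⟩ := hinv
  set sA := pvScanA img (N : Int) (M : Int) (5 * N * M + 2) with hsA
  set sB := pvScanB img (N : Int) (M : Int) (N * M + 1) with hsB
  set L₁ := sB.1 with hL₁
  -- items → getD bridge
  have hitems_getD : ∀ p ∈ sA.2.2.items, sA.2.2.getD p.1 [] = p.2 := by
    intro p hp
    exact PySem.Dict.getD_of_mem_items _ hp hnd []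
  have h0s : ∀ p ∈ sA.2.2.items, (0 : Int) ∉ p.2 := by
    intro p hp h0
    rw [← hitems_getD p hp] at h0
    have := (hcs p.1 0).mp h0
    omega
  obtain ⟨hshA2, hcharA2⟩ := pvFilterA_spec N M sA.2.2.items h0s sA.1 (hLeq ▸ hsh)
  -- counts facts
  have hcnt_eq : ∀ v : Int, pvMcount v L₁ = pvCnt N M L₁ v := by
    intro v
    have := pvMcount_cnt v L₁ M (fun r hr => hsh.2 r hr)
    rwa [hsh.1] at this
  have hkey : ∀ v : Int, v ≠ 0 →
      ((L₁.foldl (fun d row => row.foldl (fun d v => if v != 0 then d.insert v (d.getD v 0 + 1) else d) d)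
        (PySem.Dict.empty : PySem.Dict Int Int)).getD v 0 = (pvMcount v L₁ : Int)) := by
    intro v hv
    obtain ⟨-, h2, -, -⟩ := pvCounts_spec v L₁ PySem.Dict.empty
      (by rw [PySem.Dict.keys_empty]; exact List.nodup_nil)
    rw [h2 hv, PySem.Dict.getD_empty]
    ring
  have hkeynd : (L₁.foldl (fun d row => row.foldl (fun d v => if v != 0 then d.insert v (d.getD v 0 + 1) else d) d)
      (PySem.Dict.empty : PySem.Dict Int Int)).keys.Nodup := by
    obtain ⟨h1, -, -, -⟩ := pvCounts_spec 0 L₁ PySem.Dict.empty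
      (by rw [PySem.Dict.keys_empty]; exact List.nodup_nil)
    exact h1
  set counts := L₁.foldl (fun d row => row.foldl (fun d v => if v != 0 then d.insert v (d.getD v 0 + 1) else d) d)
      (PySem.Dict.empty : PySem.Dict Int Int) with hcounts
  have hkeep : ∀ v : Int,
      ((PySem.Set.ofList ((counts.items.filter fun p => decide (99 ≤ p.2)).map Prod.fst)).contains v = true)
      ↔ (v ≠ 0 ∧ 99 ≤ (pvCnt N M L₁ v : Int)) := by
    intro v
    rw [PySem.Set.contains_iff, PySem.Set.mem_ofList]
    constructor
    · intro hmem
      obtain ⟨p, hpf, rfl⟩ := List.mem_map.mp hmem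
      obtain ⟨hpmem, hp99⟩ := List.mem_filter.mp hpf
      have hgd : counts.getD p.1 0 = p.2 := PySem.Dict.getD_of_mem_items _ hpmem hkeynd 0
      by_cases hv0 : p.1 = 0
      · exfalso
        obtain ⟨-, -, -, h4⟩ := pvCounts_spec 0 L₁ PySem.Dict.empty
          (by rw [PySem.Dict.keys_empty]; exact List.nodup_nil)
        rw [← hcounts] at h4
        rw [hv0] at hgd
        rw [h4 0, PySem.Dict.getD_empty] at hgd
        rw [← hgd] at hp99
        simp at hp99
      · refine ⟨hv0, ?_⟩
        rw [← hcnt_eq p.1, ← hkey p.1 hv0, hgd]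
        simpa using hp99
    · rintro ⟨hv0, h99⟩
      have hmc : 0 < pvMcount v L₁ := by
        have := hcnt_eq v
        omega
      obtain ⟨-, -, h3, -⟩ := pvCounts_spec v L₁ PySem.Dict.empty
        (by rw [PySem.Dict.keys_empty]; exact List.nodup_nil)
      rw [← hcounts] at h3
      have hcont : counts.contains v = true := (h3 hv0).mpr (Or.inr hmc)
      have hsome : (counts.get? v).isSome := by
        rw [← PySem.Dict.contains_eq_isSome_get?]
        exact hcont
      obtain ⟨w, hw⟩ := Option.isSome_iff_exists.mp hsome
      have hwv : w = (pvMcount v L₁ : Int) := by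
        have := PySem.Dict.getD_eq_get?_getD counts v 0
        rw [hw] at this
        simp only [Option.getD_some] at this
        rw [← this, hkey v hv0]
      refine List.mem_map.mpr ⟨(v, w), List.mem_filter.mpr
        ⟨PySem.Dict.mem_items_of_get?_eq_some counts hw, ?_⟩, rfl⟩
      simp only [decide_eq_true_eq]
      rw [hwv, ← hcnt_eq v] at *
      omega
  -- the small-component condition, seen from A's dict
  have hsmall : ∀ v : Int, ((∃ p ∈ sA.2.2.items, p.1 < 100 ∧ v ∈ p.2) ↔
      (1 ≤ v ∧ v ≤ sB.2 ∧ (pvCnt N M L₁ v : Int) + 1 < 100)) := by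
    intro v
    constructor
    · rintro ⟨p, hp, hlt, hv⟩
      rw [← hitems_getD p hp] at hv
      obtain ⟨h1, h2, h3⟩ := (hcs p.1 v).mp hv
      exact ⟨h1, h2, h3 ▸ hlt⟩
    · rintro ⟨h1, h2, h3⟩
      have hv : v ∈ sA.2.2.getD ((pvCnt N M L₁ v : Int) + 1) [] :=
        (hcs _ v).mpr ⟨h1, h2, rfl⟩
      have hget : sA.2.2.get? ((pvCnt N M L₁ v : Int) + 1) ≠ none := by
        intro hnone
        rw [PySem.Dict.getD_eq_get?_getD, hnone] at hv
        simp at hv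
      obtain ⟨w, hw⟩ := Option.ne_none_iff_exists'.mp hget
      have hwv : w = sA.2.2.getD ((pvCnt N M L₁ v : Int) + 1) [] := by
        rw [PySem.Dict.getD_eq_get?_getD, hw]
        rfl
      exact ⟨((pvCnt N M L₁ v : Int) + 1, w), PySem.Dict.mem_items_of_get?_eq_some _ hw,
        h3, hwv ▸ hv⟩
  -- pointwise equality of the two final matrices
  have hfinal : ∀ d : Int × Int, pvInb (N : Int) (M : Int) d = true →
      pvG (sA.2.2.items.foldl (fun L p => if p.1 < 100 then
        p.2.foldl (fun L lab => pvZeroPass (N : Int) (M : Int) lab L) L else L) sA.1) d.1 d.2 =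
      pvG (L₁.map fun row => row.map (fun v =>
        if (PySem.Set.ofList ((counts.items.filter fun p => decide (99 ≤ p.2)).map Prod.fst)).contains v
        then v else 0)) d.1 d.2 := by
    intro d hd
    rw [hcharA2 d hd, pvG_map N M L₁ hsh _ d hd]
    have hLsub : pvG sA.1 d.1 d.2 = pvG L₁ d.1 d.2 := by rw [hLeq]
    rw [hLsub]
    set v := pvG L₁ d.1 d.2 with hv
    by_cases hv0 : v = 0
    · have hnex : ¬ ∃ p ∈ sA.2.2.items, p.1 < 100 ∧ v ∈ p.2 := by
        rintro ⟨p, hp, -, hmem⟩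
        exact h0s p hp (hv0 ▸ hmem)
      rw [if_neg hnex]
      have hnc : ¬ ((PySem.Set.ofList ((counts.items.filter fun p => decide (99 ≤ p.2)).map Prod.fst)).contains v = true) :=
        fun h => ((hkeep v).mp h).1 hv0
      rw [if_neg hnc]
      exact hv0
    · have hent' := hent d hd
      rcases hent' with h0 | ⟨h1, h2⟩
      · exact absurd (hv ▸ h0) hv0
      have hc1 : 1 ≤ pvCnt N M L₁ v := by
        unfold pvCnt
        have : 0 < (pvCells N M).countP (fun c => pvG L₁ c.1 c.2 == v) :=
          List.countP_pos_iff.mpr ⟨d, (mem_pvCells N M d).mpr hd, by simp [← hv]⟩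
        omega
      by_cases h99 : 99 ≤ (pvCnt N M L₁ v : Int)
      · have hnotsmall : ¬ ∃ p ∈ sA.2.2.items, p.1 < 100 ∧ v ∈ p.2 := by
          intro hex
          have := (hsmall v).mp hex
          omega
        rw [if_neg hnotsmall, if_pos ((hkeep v).mpr ⟨hv0, h99⟩)]
      · have hsm : ∃ p ∈ sA.2.2.items, p.1 < 100 ∧ v ∈ p.2 :=
          (hsmall v).mpr ⟨h1, h2, by omega⟩
        rw [if_pos hsm]
        have hnc : ¬ ((PySem.Set.ofList ((counts.items.filter fun p => decide (99 ≤ p.2)).map Prod.fst)).contains v = true) :=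
          fun h => h99 ((hkeep v).mp h).2
        rw [if_neg hnc]
  dsimp only
  rw [← hsA, ← hsB, ← hL₁, ← hcounts, Prod.mk.injEq]
  refine ⟨?_, by omega⟩
  exact pvMatExt N M _ _ hshA2
    (pvSh_map N M L₁ hsh _) hfinal

-- ===== VERDICT (by name: the statement is the Claim_ definition above) =====
theorem rotulacao_componentes_conexos_spec : Claim_equal_rotulacao_componentes_conexos := by
  intro img_bin _ _
  unfold Spec_rotulacao_componentes_conexos
  exact pv_main img_bin
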